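-- pv_equiv track=rewrite | github.com/annkonieczna/ASD | SEGZAMIN/2024/Bajtocja2024.py | tory_amos
-- ===== SOURCE A (Python) =====
-- from queue import PriorityQueue
-- from math import inf
--
-- def edges_to_adj(E):
--
--     n = max(max(x,y) for x,y,_,_ in E ) +1
--
--     G = [[] for _ in range(n)]
--
--     for x, y, d, t in E:
--         if t =='I':
--             t_id = 0
--         else:
--             t_id = 1
--
--         G[x].append((y,d,t_id))
--         G[y].append((x,d,t_id))
--     return G
--
-- def tory_amos(E,A,B):
--
--     G = edges_to_adj(E)
--     n = len(G)
--     q = PriorityQueue()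
--
--     dist = [[inf,inf] for _ in range(n)]
--
--     #rozważamy wszystkie możliwe wyjazdy ze stacji A
--     for v,d,t_id in G[A]:
--         dist[v][t_id] = d
--         q.put((dist[v][t_id],v,t_id))
--
--     while not q.empty():
--
--         time, u, t = q.get()
--         # już mamy lepszy czas
--         if dist[u][t] < time:
--             continue
--
--         for v,d,next_t in G[u]:
--
--             if t == next_t:
--                 if t == 0:
--                     cost = 5
--                 else:
--                     cost = 10
--             else:
--                 cost = 20
--
--             new_time = cost + d
--
--             if dist[v][next_t] > new_time + time:
--
--                 dist[v][next_t] = new_time + time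
--                 q.put((dist[v][next_t],v,next_t))
--     return min(dist[B]) if min(dist[B])<inf else -1
-- ===== SOURCE B (Python) =====
-- from math import inf
--
-- def tory_amos(E, A, B):
--     # Bellman-Ford over (station, train-type) states: build the adjacency lists,
--     # min-seed the distances of A's direct neighbours, then sweep every state edge
--     # until a full pass improves nothing (no priority queue).
--     n = max(max(x, y) for x, y, _, _ in E) + 1
--     adj = [[] for _ in range(n)]
--     for x, y, d, t in E:
--         t_id = 0 if t == 'I' else 1
--         adj[x].append((y, d, t_id))
--         adj[y].append((x, d, t_id))
--     dist = [[inf, inf] for _ in range(n)]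
--     for v, d, t_id in adj[A]:
--         if d < dist[v][t_id]:
--             dist[v][t_id] = d
--     changed = True
--     while changed:
--         changed = False
--         for u in range(n):
--             for v, d, t1 in adj[u]:
--                 for t0 in (0, 1):
--                     du = dist[u][t0]
--                     if du == inf:
--                         continue
--                     cost = (5 if t0 == 0 else 10) if t0 == t1 else 20
--                     nv = du + cost + d
--                     if nv < dist[v][t1]:
--                         dist[v][t1] = nv
--                         changed = True
--     return min(dist[B]) if min(dist[B]) < inf else -1
-- ===== Notes on version B (the rewrite author's own statement) =====
-- stated objective: alternative
-- what changed: Replaces the lazy-deletion priority-queue Dijkstra over (station, train-type) states by Bellman-Ford: the same adjacency lists, min-seeded start distances for A's neighbours, then full relaxation sweeps over every state edge repeated until one pass improves nothing; no queue and no stale-entry bookkeeping. Pre_ excludes the empty edge list and out-of-range ids (A raises), travel times below -5 (A's loop need not terminate), and duplicate A-incident seeds with different times, on which A's last-write seeding and B's min-seeding are both defensible.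
-- outside the precondition, e.g. on tory_amos([(0, 1, 2, 'I'), (0, 1, 10, 'I')], 0, 1): A returns 10, B returns 2; on tory_amos([(0, 1, 3, 'I'), (2, 3, -10, 'I')], 0, 1): A returns 3, B returns 3
import Mathlib
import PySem

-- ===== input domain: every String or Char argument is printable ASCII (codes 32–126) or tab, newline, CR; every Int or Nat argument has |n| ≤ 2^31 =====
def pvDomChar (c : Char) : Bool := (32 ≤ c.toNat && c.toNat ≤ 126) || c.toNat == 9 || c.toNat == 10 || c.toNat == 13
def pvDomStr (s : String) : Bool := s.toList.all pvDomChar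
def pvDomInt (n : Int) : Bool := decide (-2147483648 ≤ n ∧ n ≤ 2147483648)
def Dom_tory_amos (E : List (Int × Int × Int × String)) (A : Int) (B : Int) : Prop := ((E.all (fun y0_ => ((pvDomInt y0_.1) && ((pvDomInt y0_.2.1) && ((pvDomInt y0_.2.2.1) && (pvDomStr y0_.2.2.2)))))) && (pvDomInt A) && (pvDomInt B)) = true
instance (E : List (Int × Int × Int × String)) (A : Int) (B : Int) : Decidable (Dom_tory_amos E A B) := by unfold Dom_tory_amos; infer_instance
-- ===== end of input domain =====

-- B replaces A's priority-queue Dijkstra over (station, train-type) states by Bellman-Ford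
-- relaxation sweeps over all state edges until a pass changes nothing (objective:
-- alternative algorithm, same exact result on Pre_).

-- ===== PORT A =====
-- Port notes: Python's `dist` (a length-n list of [inf, inf] cells) is ported as a finite map
-- keyed by (station, train-type), an absent key being exactly `inf`; Python's negative list
-- indexing is `pvWrap`; inputs where Python raises (empty E, an index out of range) are
-- excluded by Pre_ below.  The PriorityQueue pops the lexicographically least (time, u, t) triple.
def pvTid (t : String) : Int := if t = "I" then 0 else 1

def pvCost (t0 t1 : Int) : Int := if t0 = t1 then (if t0 = 0 then 5 else 10) else 20

def pvMaxNode (E : List (Int × Int × Int × String)) : Int :=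
  match E with
  | [] => -1   -- Python raises ValueError on an empty generator; excluded by Pre_
  | e :: es => es.foldl (fun m f => max m (max f.1 f.2.1)) (max e.1 e.2.1)

def pvWrap (n i : Int) : Int := if i < 0 then i + n else i

abbrev PVG := PySem.Dict Int (List (Int × Int × Int))
abbrev PVD := PySem.Dict (Int × Int) Int

def pvBuildG (n : Int) (E : List (Int × Int × Int × String)) : PVG :=
  E.foldl (fun G e =>
    let tid := pvTid e.2.2.2
    let G1 := G.insert (pvWrap n e.1) (G.getD (pvWrap n e.1) [] ++ [(e.2.1, e.2.2.1, tid)])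
    G1.insert (pvWrap n e.2.1) (G1.getD (pvWrap n e.2.1) [] ++ [(e.1, e.2.2.1, tid)]))
    PySem.Dict.empty

def pvLtb (a b : Int × Int × Int) : Bool :=
  decide (a.1 < b.1) || (decide (a.1 = b.1) &&
    (decide (a.2.1 < b.2.1) || (decide (a.2.1 = b.2.1) && decide (a.2.2 < b.2.2))))

def pvQMin (q : List (Int × Int × Int)) : Option (Int × Int × Int) :=
  match q with
  | [] => none
  | x :: xs => some (xs.foldl (fun m y => if pvLtb y m then y else m) x)

-- the inner `for v, d, next_t in G[u]` loop of the Dijkstra while-loop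
def pvRelaxA (n time t : Int) (L : List (Int × Int × Int))
    (qd : List (Int × Int × Int) × PVD) : List (Int × Int × Int) × PVD :=
  L.foldl (fun qd v =>
    let nt := pvCost t v.2.2 + v.2.1 + time   -- new_time + time
    match qd.2.get? (pvWrap n v.1, v.2.2) with
    | none => (qd.1 ++ [(nt, v.1, v.2.2)], qd.2.insert (pvWrap n v.1, v.2.2) nt)
    | some cur =>
      if nt < cur then (qd.1 ++ [(nt, v.1, v.2.2)], qd.2.insert (pvWrap n v.1, v.2.2) nt)
      else qd) qd

-- the `while not q.empty()` loop; fuel only makes it total (Pre_ proves it never runs out)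
def pvLoopA (n : Int) (G : PVG) : Nat → List (Int × Int × Int) → PVD → PVD
  | 0, _, dist => dist
  | fuel + 1, q, dist =>
    match pvQMin q with
    | none => dist
    | some e =>
      let q' := q.erase e
      let stale := match dist.get? (pvWrap n e.2.1, e.2.2) with
        | some du => decide (du < e.1)
        | none => false
      if stale then pvLoopA n G fuel q' dist
      else
        let qd := pvRelaxA n e.1 e.2.2 (G.getD (pvWrap n e.2.1) []) (q', dist)
        pvLoopA n G fuel qd.1 qd.2

def pvS0 (E : List (Int × Int × Int × String)) : Int := E.foldl (fun s e => s + |e.2.2.1|) 0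
def pvW (E : List (Int × Int × Int × String)) : Int := 20 + pvS0 E
def pvK (SS : List (Int × Int)) (E : List (Int × Int × Int × String)) : Int :=
  pvS0 E + SS.length * pvW E
def pvFuel (SS : List (Int × Int)) (E : List (Int × Int × Int × String)) (extra : Nat) : Nat :=
  extra + SS.length * ((pvK SS E + pvS0 E).toNat + 1) + 1

def pvStatesA (n : Int) (E : List (Int × Int × Int × String)) : List (Int × Int) :=
  E.flatMap (fun e => [(pvWrap n e.1, pvTid e.2.2.2), (pvWrap n e.2.1, pvTid e.2.2.2)])

-- `dist[v][t_id] = d; q.put((dist[v][t_id], v, t_id))` — the value pushed is the d just assigned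
def pvSeedFold (n : Int) (L : List (Int × Int × Int)) : List (Int × Int × Int) × PVD :=
  L.foldl (fun qd v =>
      (qd.1 ++ [(v.2.1, v.1, v.2.2)], qd.2.insert (pvWrap n v.1, v.2.2) v.2.1))
    (([], PySem.Dict.empty) : List (Int × Int × Int) × PVD)

-- `min(dist[B])` over the two cells, `-1` when both are inf
def pvReadout (d : PVD) (k0 k1 : Int × Int) : Int :=
  match d.get? k0, d.get? k1 with
  | none, none => -1
  | some v, none => v
  | none, some v => v
  | some v0, some v1 => min v0 v1

def tory_amos (E : List (Int × Int × Int × String)) (A : Int) (B : Int) : Int :=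
  let n := pvMaxNode E + 1
  let G := pvBuildG n E
  let qd0 := pvSeedFold n (G.getD (pvWrap n A) [])
  let dist := pvLoopA n G (pvFuel (pvStatesA n E) E qd0.1.length) qd0.1 qd0.2
  pvReadout dist (pvWrap n B, 0) (pvWrap n B, 1)

-- ===== PORT B =====
-- Port notes: Source B builds the same adjacency lists as A (shared helper pvBuildG) and the
-- same length-n dist table of [inf, inf] cells, ported as a finite map with absent key =
-- inf; Python's negative list indexing is pvWrap, as on the A side.
-- `if d < dist[v][t_id]: dist[v][t_id] = d` — the min-seeding of A's direct neighbours
def pvSeedStep (n : Int) (dd : PVD) (v : Int × Int × Int) : PVD :=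
  match dd.get? (pvWrap n v.1, v.2.2) with
  | none => dd.insert (pvWrap n v.1, v.2.2) v.2.1
  | some cur => if v.2.1 < cur then dd.insert (pvWrap n v.1, v.2.2) v.2.1 else dd

def pvSeedB (n : Int) (L : List (Int × Int × Int)) : PVD :=
  L.foldl (pvSeedStep n) PySem.Dict.empty

-- the innermost `for t0 in (0, 1)` body: one relaxation attempt of dist[v][t1]
def pvRelaxStepB (n : Int) (st : PVD × Bool) (u : Int) (en : Int × Int × Int) (t0 : Int) :
    PVD × Bool :=
  match st.1.get? (u, t0) with
  | none => st
  | some du =>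
    let nv := du + pvCost t0 en.2.2 + en.2.1
    match st.1.get? (pvWrap n en.1, en.2.2) with
    | none => (st.1.insert (pvWrap n en.1, en.2.2) nv, true)
    | some cur => if nv < cur then (st.1.insert (pvWrap n en.1, en.2.2) nv, true) else st

def pvEdgeSweep (n : Int) (st : PVD × Bool) (u : Int) (en : Int × Int × Int) : PVD × Bool :=
  [(0 : Int), 1].foldl (fun st t0 => pvRelaxStepB n st u en t0) st

def pvNodeSweep (n : Int) (G : PVG) (st : PVD × Bool) (u : Int) : PVD × Bool :=
  (G.getD u []).foldl (fun st en => pvEdgeSweep n st u en) st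

-- one full pass `for u in range(n): for v, d, t1 in adj[u]: ...`
def pvPassB (n : Int) (G : PVG) (st : PVD × Bool) : PVD × Bool :=
  (PySem.List.pyRange 0 n 1).foldl (fun st u => pvNodeSweep n G st u) st

-- `while changed:` — fuel only makes it total (Pre_ proves it never runs out)
def pvLoopB (n : Int) (G : PVG) : Nat → PVD → PVD
  | 0, dist => dist
  | fuel + 1, dist =>
    let st := pvPassB n G (dist, false)
    if st.2 then pvLoopB n G fuel st.1 else st.1

def tory_amos_alt (E : List (Int × Int × Int × String)) (A : Int) (B : Int) : Int :=
  let n := pvMaxNode E + 1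
  let adj := pvBuildG n E
  let dist0 := pvSeedB n (adj.getD (pvWrap n A) [])
  let dist := pvLoopB n adj (pvFuel (pvStatesA n E) E 0) dist0
  pvReadout dist (pvWrap n B, 0) (pvWrap n B, 1)

-- ===== PRECONDITION & SPEC =====
-- the ordered list of A's departure seeds ((station, type), travel time), as A's G[A] yields them
def pvSeedsPre (E : List (Int × Int × Int × String)) (A : Int) : List ((Int × Int) × Int) :=
  E.flatMap (fun e =>
    (if e.1 = A then [((e.2.1, pvTid e.2.2.2), e.2.2.1)] else []) ++
    (if e.2.1 = A then [((e.1, pvTid e.2.2.2), e.2.2.1)] else []))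

-- E with every station id replaced by the array slot it denotes (Python list indexing)
def pvNormE (n : Int) (E : List (Int × Int × Int × String)) : List (Int × Int × Int × String) :=
  E.map (fun e => (pvWrap n e.1, pvWrap n e.2.1, e.2.2.1, e.2.2.2))

-- Pre_ restricts to the task's natural domain and defensible corners: it excludes the empty
-- edge list (A raises ValueError), station ids and endpoints A, B outside the Python list-index
-- range -n..n-1 (A raises IndexError), travel times below -5 (some relaxation weights turn
-- negative and A's Dijkstra loop need not terminate), and two A-incident edges of the same
-- (neighbour, type) with different times (A's last-write seeding and B's min-seeding are both
-- defensible there).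
def Pre_tory_amos (E : List (Int × Int × Int × String)) (A : Int) (B : Int) : Prop :=
  E ≠ [] ∧ 0 ≤ pvMaxNode E ∧
  (∀ e ∈ E, -(pvMaxNode E + 1) ≤ e.1 ∧ -(pvMaxNode E + 1) ≤ e.2.1 ∧ -5 ≤ e.2.2.1) ∧
  -(pvMaxNode E + 1) ≤ A ∧ A ≤ pvMaxNode E ∧ -(pvMaxNode E + 1) ≤ B ∧ B ≤ pvMaxNode E ∧
  ∀ p ∈ pvSeedsPre (pvNormE (pvMaxNode E + 1) E) (pvWrap (pvMaxNode E + 1) A),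
    ∀ q ∈ pvSeedsPre (pvNormE (pvMaxNode E + 1) E) (pvWrap (pvMaxNode E + 1) A),
      p.1 = q.1 → p.2 = q.2

instance (E : List (Int × Int × Int × String)) (A : Int) (B : Int) :
    Decidable (Pre_tory_amos E A B) := by unfold Pre_tory_amos; infer_instance

def pvWitness_tory_amos : (List (Int × Int × Int × String)) × Int × Int := ([(0, 1, 3, "I")], 0, 1)

def Spec_tory_amos (E : List (Int × Int × Int × String)) (A : Int) (B : Int) (out : Int) : Prop := out = tory_amos_alt E A B
instance (E : List (Int × Int × Int × String)) (A : Int) (B : Int) (out : Int) : Decidable (Spec_tory_amos E A B out) := by unfold Spec_tory_amos; infer_instance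

-- ===== CLAIM (what is proved, stated in full; the proofs are below) =====
def Claim_equal_tory_amos : Prop := ∀ (E : List (Int × Int × Int × String)) (A : Int) (B : Int), Dom_tory_amos E A B → Pre_tory_amos E A B → Spec_tory_amos E A B (tory_amos E A B)

-- ===== LEMMAS AND PROOFS =====

-- the (station, type) states of an edge list
def pvStatesB (E : List (Int × Int × Int × String)) : List (Int × Int) :=
  E.flatMap (fun e => [(e.1, pvTid e.2.2.2), (e.2.1, pvTid e.2.2.2)])

-- ---------- small facts about the shared helpers ----------
theorem pvTid_01 (t : String) : pvTid t = 0 ∨ pvTid t = 1 := by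
  unfold pvTid; split <;> simp

theorem pvCost_pos (t0 t1 : Int) : 5 ≤ pvCost t0 t1 := by
  unfold pvCost; split <;> [split <;> omega; omega]

theorem pvCost_le (t0 t1 : Int) : pvCost t0 t1 ≤ 20 := by
  unfold pvCost; split <;> [split <;> omega; omega]

theorem pvS0_eq (E : List (Int × Int × Int × String)) :
    pvS0 E = (E.map (fun e => |e.2.2.1|)).sum := by
  unfold pvS0; rw [PySem.List.foldl_add]; simp

theorem pvS0_nonneg (E : List (Int × Int × Int × String)) : 0 ≤ pvS0 E := by
  rw [pvS0_eq]
  exact List.sum_nonneg (by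
    intro x hx; obtain ⟨e, _, rfl⟩ := List.mem_map.1 hx; exact abs_nonneg _)

theorem pvabs_le_S0 (E : List (Int × Int × Int × String))
    (e : Int × Int × Int × String) (he : e ∈ E) : |e.2.2.1| ≤ pvS0 E := by
  rw [pvS0_eq]
  exact List.single_le_sum (by
      intro x hx; obtain ⟨f, _, rfl⟩ := List.mem_map.1 hx; exact abs_nonneg _)
    _ (List.mem_map.2 ⟨e, he, rfl⟩)

theorem pvd_le_S0 (E : List (Int × Int × Int × String))
    (e : Int × Int × Int × String) (he : e ∈ E) : e.2.2.1 ≤ pvS0 E :=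
  le_trans (le_abs_self _) (pvabs_le_S0 E e he)

theorem pvd_ge_negS0 (E : List (Int × Int × Int × String))
    (e : Int × Int × Int × String) (he : e ∈ E) : -pvS0 E ≤ e.2.2.1 := by
  have := pvabs_le_S0 E e he
  have := abs_nonneg e.2.2.1
  have := neg_abs_le e.2.2.1
  omega

theorem pvW_pos (E : List (Int × Int × Int × String)) : 0 < pvW E := by
  unfold pvW; have := pvS0_nonneg E; omega

theorem pvStatesB_mem_x (E : List (Int × Int × Int × String)) (e : Int × Int × Int × String)
    (he : e ∈ E) : (e.2.1, pvTid e.2.2.2) ∈ pvStatesB E := by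
  unfold pvStatesB; exact List.mem_flatMap.2 ⟨e, he, by simp⟩

theorem pvStatesB_mem_y (E : List (Int × Int × Int × String)) (e : Int × Int × Int × String)
    (he : e ∈ E) : (e.1, pvTid e.2.2.2) ∈ pvStatesB E := by
  unfold pvStatesB; exact List.mem_flatMap.2 ⟨e, he, by simp⟩

theorem pvStatesB_snd (E : List (Int × Int × Int × String)) (s : Int × Int)
    (hs : s ∈ pvStatesB E) : s.2 = 0 ∨ s.2 = 1 := by
  unfold pvStatesB at hs
  obtain ⟨e, _, hm⟩ := List.mem_flatMap.1 hs
  have h01 := pvTid_01 e.2.2.2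
  simp only [List.mem_cons] at hm
  rcases hm with h | h | h <;> first | (subst h; simpa using h01) | simp at h

theorem pvWrap_nn (n x : Int) (h : -n ≤ x) : 0 ≤ pvWrap n x := by
  unfold pvWrap; split <;> omega

theorem pvFoldMax_le (l : List (Int × Int × Int × String)) (a : Int) :
    a ≤ l.foldl (fun m f => max m (max f.1 f.2.1)) a := by
  induction l generalizing a with
  | nil => simp
  | cons e es ih => exact le_trans (le_max_left _ _) (ih _)

theorem pvFoldMax_ge (l : List (Int × Int × Int × String)) :
    ∀ (a : Int) (e : Int × Int × Int × String), e ∈ l →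
      max e.1 e.2.1 ≤ l.foldl (fun m f => max m (max f.1 f.2.1)) a := by
  induction l with
  | nil => intro a e he; cases he
  | cons f fs ih =>
    intro a e he
    simp only [List.foldl_cons]
    rcases List.mem_cons.1 he with rfl | he'
    · exact le_trans (le_max_right a (max e.1 e.2.1)) (pvFoldMax_le fs _)
    · exact ih _ e he'

theorem pvMaxNode_ge (E : List (Int × Int × Int × String)) (e : Int × Int × Int × String)
    (he : e ∈ E) : e.1 ≤ pvMaxNode E ∧ e.2.1 ≤ pvMaxNode E := by
  cases E with
  | nil => cases he
  | cons f fs =>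
    have hm : max e.1 e.2.1 ≤ pvMaxNode (f :: fs) := by
      rcases List.mem_cons.1 he with rfl | he'
      · exact pvFoldMax_le fs (max e.1 e.2.1)
      · exact pvFoldMax_ge fs (max f.1 f.2.1) e he'
    exact ⟨le_trans (le_max_left _ _) hm, le_trans (le_max_right _ _) hm⟩

theorem pvStatesA_eq (n : Int) (E : List (Int × Int × Int × String)) :
    pvStatesA n E = pvStatesB (pvNormE n E) := by
  unfold pvStatesA pvStatesB pvNormE
  rw [List.flatMap_map]

theorem pvS0_norm (n : Int) (E : List (Int × Int × Int × String)) :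
    pvS0 (pvNormE n E) = pvS0 E := by
  unfold pvS0 pvNormE
  rw [List.foldl_map]

theorem pvK_norm (n : Int) (SS : List (Int × Int)) (E : List (Int × Int × Int × String)) :
    pvK SS (pvNormE n E) = pvK SS E := by
  unfold pvK pvW
  rw [pvS0_norm]

theorem pvNormE_facts (n : Int) (E : List (Int × Int × Int × String))
    (hr : ∀ e ∈ E, -n ≤ e.1 ∧ -n ≤ e.2.1 ∧ -5 ≤ e.2.2.1) :
    ∀ en ∈ pvNormE n E, 0 ≤ en.1 ∧ 0 ≤ en.2.1 ∧ -5 ≤ en.2.2.1 := by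
  intro en hen
  obtain ⟨e, he, rfl⟩ := List.mem_map.1 hen
  exact ⟨pvWrap_nn n e.1 (hr e he).1, pvWrap_nn n e.2.1 (hr e he).2.1, (hr e he).2.2⟩

-- ---------- the common specification: reachable costs ----------
-- pvReach E S s c: there is a trip from station S ending in state s (station, train-type)
-- of total cost c: a first ride with no entry cost, then rides each costing switch + travel.
inductive pvReach (E : List (Int × Int × Int × String)) (S : Int) : Int × Int → Int → Prop where
  | seedx (e : Int × Int × Int × String) (he : e ∈ E) (hx : e.1 = S) :
      pvReach E S (e.2.1, pvTid e.2.2.2) e.2.2.1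
  | seedy (e : Int × Int × Int × String) (he : e ∈ E) (hy : e.2.1 = S) :
      pvReach E S (e.1, pvTid e.2.2.2) e.2.2.1
  | stepx (e : Int × Int × Int × String) (he : e ∈ E) (t0 c : Int)
      (h : pvReach E S (e.1, t0) c) :
      pvReach E S (e.2.1, pvTid e.2.2.2) (c + pvCost t0 (pvTid e.2.2.2) + e.2.2.1)
  | stepy (e : Int × Int × Int × String) (he : e ∈ E) (t0 c : Int)
      (h : pvReach E S (e.2.1, t0) c) :
      pvReach E S (e.1, pvTid e.2.2.2) (c + pvCost t0 (pvTid e.2.2.2) + e.2.2.1)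

def pvOLe (o : Option Int) (c : Int) : Prop := ∃ v, o = some v ∧ v ≤ c

theorem pvOLe_mono (o : Option Int) (c c' : Int) (h : pvOLe o c) (hc : c ≤ c') : pvOLe o c' := by
  obtain ⟨v, hv, hvc⟩ := h; exact ⟨v, hv, le_trans hvc hc⟩

-- o is exactly the best reachable cost for state s (none iff unreachable)
def pvBest (E : List (Int × Int × Int × String)) (S : Int) (s : Int × Int) (o : Option Int) : Prop :=
  (∀ c, pvReach E S s c → pvOLe o c) ∧ (∀ v, o = some v → pvReach E S s v)

theorem pvBest_unique (E : List (Int × Int × Int × String)) (S : Int) (s : Int × Int)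
    (o o' : Option Int) (h : pvBest E S s o) (h' : pvBest E S s o') : o = o' := by
  cases o with
  | none =>
    cases o' with
    | none => rfl
    | some v => obtain ⟨w, hw, _⟩ := h.1 v (h'.2 v rfl); simp at hw
  | some v =>
    cases o' with
    | none => obtain ⟨w, hw, _⟩ := h'.1 v (h.2 v rfl); simp at hw
    | some v' =>
      obtain ⟨w, hw, hwv⟩ := h.1 v' (h'.2 v' rfl)
      obtain ⟨w', hw', hwv'⟩ := h'.1 v (h.2 v rfl)
      simp only [Option.some.injEq] at hw hw'
      subst hw; subst hw'; congr 1; omega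

def pvSound (E : List (Int × Int × Int × String)) (S : Int) (d : PVD) : Prop :=
  ∀ s v, d.get? s = some v → pvReach E S s v

def pvSeedUp (E : List (Int × Int × Int × String)) (S : Int) (d : PVD) : Prop :=
  (∀ e ∈ E, e.1 = S → pvOLe (d.get? (e.2.1, pvTid e.2.2.2)) e.2.2.1) ∧
  (∀ e ∈ E, e.2.1 = S → pvOLe (d.get? (e.1, pvTid e.2.2.2)) e.2.2.1)

def pvCons (E : List (Int × Int × Int × String)) (S : Int) (d : PVD) : Prop :=
  pvSeedUp E S d ∧
  (∀ e ∈ E, ∀ t0 du, d.get? (e.1, t0) = some du →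
      pvOLe (d.get? (e.2.1, pvTid e.2.2.2)) (du + pvCost t0 (pvTid e.2.2.2) + e.2.2.1)) ∧
  (∀ e ∈ E, ∀ t0 du, d.get? (e.2.1, t0) = some du →
      pvOLe (d.get? (e.1, pvTid e.2.2.2)) (du + pvCost t0 (pvTid e.2.2.2) + e.2.2.1))

theorem pvCons_reach (E : List (Int × Int × Int × String)) (S : Int) (d : PVD)
    (hC : pvCons E S d) (s : Int × Int) (c : Int) (h : pvReach E S s c) :
    pvOLe (d.get? s) c := by
  induction h with
  | seedx e he hx => exact hC.1.1 e he hx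
  | seedy e he hy => exact hC.1.2 e he hy
  | stepx e he t0 c h ih =>
    obtain ⟨v, hv, hvc⟩ := ih
    exact pvOLe_mono _ _ _ (hC.2.1 e he t0 v hv) (by omega)
  | stepy e he t0 c h ih =>
    obtain ⟨v, hv, hvc⟩ := ih
    exact pvOLe_mono _ _ _ (hC.2.2 e he t0 v hv) (by omega)

theorem pvBest_of (E : List (Int × Int × Int × String)) (S : Int) (d : PVD)
    (hS : pvSound E S d) (hC : pvCons E S d) (s : Int × Int) : pvBest E S s (d.get? s) :=
  ⟨fun c hc => pvCons_reach E S d hC s c hc, fun v hv => hS s v hv⟩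

-- ---------- pointwise improvement order on distance maps ----------
def pvDLe (f g : PVD) : Prop :=
  ∀ s v, g.get? s = some v → ∃ w, f.get? s = some w ∧ w ≤ v

theorem pvDLe_refl (f : PVD) : pvDLe f f := fun _ v hv => ⟨v, hv, le_refl v⟩

theorem pvDLe_trans (f g h : PVD) (h1 : pvDLe f g) (h2 : pvDLe g h) : pvDLe f h := by
  intro s v hv
  obtain ⟨w, hw, hwv⟩ := h2 s v hv
  obtain ⟨w', hw', hww⟩ := h1 s w hw
  exact ⟨w', hw', le_trans hww hwv⟩

theorem pvDLe_OLe (f g : PVD) (h : pvDLe f g) (s : Int × Int) (c : Int)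
    (ho : pvOLe (g.get? s) c) : pvOLe (f.get? s) c := by
  obtain ⟨v, hv, hvc⟩ := ho
  obtain ⟨w, hw, hwv⟩ := h s v hv
  exact ⟨w, hw, le_trans hwv hvc⟩

theorem pvSeedUp_mono (E : List (Int × Int × Int × String)) (S : Int) (f g : PVD)
    (h : pvDLe f g) (hg : pvSeedUp E S g) : pvSeedUp E S f :=
  ⟨fun e he hx => pvDLe_OLe f g h _ _ (hg.1 e he hx),
   fun e he hy => pvDLe_OLe f g h _ _ (hg.2 e he hy)⟩

-- ---------- bounded-values invariant and the termination potential ----------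
def pvKB (SS : List (Int × Int)) (E : List (Int × Int × Int × String)) (d : PVD) : Prop :=
  d.keys.Nodup ∧ (∀ s ∈ d.keys, s ∈ SS) ∧
  ∀ s v, d.get? s = some v → -pvS0 E ≤ v ∧ v ≤ pvS0 E + d.size * pvW E

def pvMu (K S0 : Int) (o : Option Int) : Nat :=
  match o with
  | none => (K + S0 + 1).toNat
  | some v => (v + S0).toNat

def pvPhi (K S0 : Int) (SS : List (Int × Int)) (d : PVD) : Nat :=
  (SS.map (fun s => pvMu K S0 (d.get? s))).sum

theorem pvKeys_le (SS : List (Int × Int)) (l : List (Int × Int))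
    (hnd : l.Nodup) (hsub : ∀ s ∈ l, s ∈ SS) : l.length ≤ SS.length := by
  calc l.length = l.toFinset.card := (List.toFinset_card_of_nodup hnd).symm
    _ ≤ SS.toFinset.card := Finset.card_le_card (by
        intro x hx; rw [List.mem_toFinset] at *; exact hsub x hx)
    _ ≤ SS.length := List.toFinset_card_le SS

theorem pvSize_eq_keys (d : PVD) : d.size = d.keys.length := by
  simp [PySem.Dict.size, PySem.Dict.keys]

theorem pvVal_le_K (SS : List (Int × Int)) (E : List (Int × Int × Int × String)) (d : PVD)
    (hKB : pvKB SS E d) (hW : 0 < pvW E) (s : Int × Int) (v : Int)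
    (hv : d.get? s = some v) : v ≤ pvK SS E := by
  obtain ⟨hnd, hsub, hbd⟩ := hKB
  have h1 := (hbd s v hv).2
  have h2 : d.size ≤ SS.length := by
    rw [pvSize_eq_keys]; exact pvKeys_le SS d.keys hnd hsub
  unfold pvK
  nlinarith [h1, h2, hW]

-- the workhorse: one improving insert keeps pvKB, improves pointwise, and strictly drops Φ
theorem pvInsert_step (SS : List (Int × Int)) (E : List (Int × Int × Int × String))
    (d : PVD) (k : Int × Int) (nv : Int)
    (hKB : pvKB SS E d) (hk : k ∈ SS) (h0 : -pvS0 E ≤ nv) (hW : 0 < pvW E)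
    (hcase : (d.get? k = none ∧ nv ≤ pvS0 E + (d.size + 1) * pvW E) ∨
             (∃ cur, d.get? k = some cur ∧ nv < cur)) :
    pvKB SS E (d.insert k nv) ∧ pvDLe (d.insert k nv) d ∧
    pvPhi (pvK SS E) (pvS0 E) SS (d.insert k nv) < pvPhi (pvK SS E) (pvS0 E) SS d := by
  obtain ⟨hnd, hsub, hbd⟩ := hKB
  have hS0 := pvS0_nonneg E
  have hgi : ∀ s, (d.insert k nv).get? s = if s = k then some nv else d.get? s :=
    fun s => PySem.Dict.get?_insert d k s nv
  have hsizemono : (d.size : Int) ≤ (d.insert k nv).size := by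
    rw [PySem.Dict.size_insert]; split <;> simp
  have hKB' : pvKB SS E (d.insert k nv) := by
    refine ⟨PySem.Dict.nodup_keys_insert d k nv hnd, ?_, ?_⟩
    · intro s hs
      rcases (PySem.Dict.mem_keys_insert d k s nv).1 hs with rfl | hs'
      · exact hk
      · exact hsub s hs'
    · intro s v hv
      rw [hgi] at hv
      split at hv
      · cases hv
        rcases hcase with ⟨hnone, hle⟩ | ⟨cur, hcur, hlt⟩
        · have hcont : d.contains k = false := by
            rw [PySem.Dict.get?_eq_none_iff_not_mem_keys] at hnone
            cases hcc : d.contains k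
            · rfl
            · exact absurd ((PySem.Dict.contains_iff_mem_keys d k).1 hcc) hnone
          rw [PySem.Dict.size_insert, hcont]
          simp only [if_false, Bool.false_eq_true]
          refine ⟨h0, ?_⟩
          push_cast
          linarith
        · have hb := hbd k cur hcur
          refine ⟨h0, le_trans (le_of_lt hlt) (le_trans hb.2 ?_)⟩
          have : (d.size : Int) ≤ ((d.insert k nv).size : Int) := hsizemono
          nlinarith
      · have hb := hbd s v hv
        refine ⟨hb.1, le_trans hb.2 ?_⟩
        nlinarith
  have hDLe : pvDLe (d.insert k nv) d := by
    intro s v hv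
    by_cases hs : s = k
    · subst hs
      rcases hcase with ⟨hnone, _⟩ | ⟨cur, hcur, hlt⟩
      · rw [hnone] at hv; cases hv
      · rw [hcur] at hv; cases hv
        exact ⟨nv, by rw [hgi]; simp, le_of_lt hlt⟩
    · exact ⟨v, by rw [hgi]; simp [hs, hv], le_refl v⟩
  refine ⟨hKB', hDLe, ?_⟩
  have hgk : (d.insert k nv).get? k = some nv := by rw [hgi]; simp
  have hnvK : nv ≤ pvK SS E :=
    pvVal_le_K SS E (d.insert k nv) hKB' hW k nv hgk
  unfold pvPhi
  refine List.sum_lt_sum _ _ ?_ ⟨k, hk, ?_⟩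
  · intro s _
    by_cases hs : s = k
    · subst hs
      rw [hgk]
      rcases hcase with ⟨hnone, _⟩ | ⟨cur, hcur, hlt⟩
      · rw [hnone]; simp only [pvMu]; omega
      · rw [hcur]; simp only [pvMu]; omega
    · rw [hgi, if_neg hs]
  · rw [hgk]
    rcases hcase with ⟨hnone, _⟩ | ⟨cur, hcur, hlt⟩
    · rw [hnone]; simp only [pvMu]; omega
    · have hcb := (hbd k cur hcur).1
      rw [hcur]; simp only [pvMu]; omega

theorem pvPhi_le (SS : List (Int × Int)) (E : List (Int × Int × Int × String)) (d : PVD)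
    (hKB : pvKB SS E d) (hW : 0 < pvW E) :
    pvPhi (pvK SS E) (pvS0 E) SS d ≤ SS.length * ((pvK SS E + pvS0 E).toNat + 1) := by
  unfold pvPhi
  have hS0 := pvS0_nonneg E
  have h := List.sum_le_card_nsmul (SS.map (fun s => pvMu (pvK SS E) (pvS0 E) (d.get? s)))
    ((pvK SS E + pvS0 E).toNat + 1) (by
      intro x hx
      obtain ⟨s, _, rfl⟩ := List.mem_map.1 hx
      cases hg : d.get? s with
      | none => simp only [pvMu]; omega
      | some v =>
        have := pvVal_le_K SS E d hKB hW s v hg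
        simp only [pvMu]; omega)
  simpa [smul_eq_mul] using h

-- ---------- shared invariant shells ----------
def pvInvB (SS : List (Int × Int)) (E : List (Int × Int × Int × String)) (S : Int)
    (d : PVD) : Prop :=
  pvSound E S d ∧ pvKB SS E d ∧ pvSeedUp E S d

theorem pvKB_empty (SS : List (Int × Int)) (E : List (Int × Int × Int × String)) :
    pvKB SS E PySem.Dict.empty := by
  refine ⟨by simp [PySem.Dict.keys_empty], by simp [PySem.Dict.keys_empty], ?_⟩
  intro s v hv
  rw [PySem.Dict.get?_empty] at hv
  cases hv

def pvRelCond (d : PVD) (u v dd t1 t0 : Int) : Prop :=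
  ∀ du, d.get? (u, t0) = some du → pvOLe (d.get? (v, t1)) (du + pvCost t0 t1 + dd)

theorem pvGet_t01 (E : List (Int × Int × Int × String)) (d : PVD)
    (hKB : pvKB (pvStatesB E) E d) (u t0 du : Int) (h : d.get? (u, t0) = some du) :
    t0 = 0 ∨ t0 = 1 := by
  have hk : (u, t0) ∈ d.keys := by
    by_contra hc
    rw [← PySem.Dict.get?_eq_none_iff_not_mem_keys] at hc
    rw [hc] at h; cases h
  exact pvStatesB_snd E (u, t0) (hKB.2.1 _ hk)

-- ---------- port A: Dijkstra ----------
def pvLEdge (E : List (Int × Int × Int × String)) (u : Int) (v : Int × Int × Int) : Prop :=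
  ∃ e ∈ E, (u = e.1 ∧ v = (e.2.1, e.2.2.1, pvTid e.2.2.2)) ∨
           (u = e.2.1 ∧ v = (e.1, e.2.2.1, pvTid e.2.2.2))

-- the per-edge step of pvBuildG
def pvGStep (n : Int) (G : PVG) (e : Int × Int × Int × String) : PVG :=
  let tid := pvTid e.2.2.2
  let G1 := G.insert (pvWrap n e.1) (G.getD (pvWrap n e.1) [] ++ [(e.2.1, e.2.2.1, tid)])
  G1.insert (pvWrap n e.2.1) (G1.getD (pvWrap n e.2.1) [] ++ [(e.1, e.2.2.1, tid)])

theorem pvBuildG_eq (n : Int) (E : List (Int × Int × Int × String)) :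
    pvBuildG n E = E.foldl (pvGStep n) PySem.Dict.empty := rfl

theorem pvGmono1 (G : PVG) (k : Int) (x : Int × Int × Int) (u : Int) (v : Int × Int × Int)
    (hv : v ∈ G.getD u []) : v ∈ (G.insert k (G.getD k [] ++ [x])).getD u [] := by
  rw [PySem.Dict.getD_insert]
  split
  · subst ‹u = k›; exact List.mem_append_left _ hv
  · exact hv

theorem pvGStep_mono (n : Int) (G : PVG) (e : Int × Int × Int × String) (u : Int)
    (v : Int × Int × Int) (hv : v ∈ G.getD u []) : v ∈ (pvGStep n G e).getD u [] :=
  pvGmono1 _ _ _ _ _ (pvGmono1 _ _ _ _ _ hv)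

theorem pvGStep_sound (n : Int) (G : PVG) (e : Int × Int × Int × String) (u : Int)
    (v : Int × Int × Int) (hv : v ∈ (pvGStep n G e).getD u []) :
    v ∈ G.getD u [] ∨ (u = pvWrap n e.1 ∧ v = (e.2.1, e.2.2.1, pvTid e.2.2.2)) ∨
      (u = pvWrap n e.2.1 ∧ v = (e.1, e.2.2.1, pvTid e.2.2.2)) := by
  unfold pvGStep at hv
  simp only [PySem.Dict.getD_insert] at hv
  by_cases h2 : u = pvWrap n e.2.1
  · rw [if_pos h2] at hv
    rcases List.mem_append.1 hv with hv' | hv'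
    · split at hv'
      · rcases List.mem_append.1 hv' with hv'' | hv''
        · exact Or.inl (by rw [← ‹pvWrap n e.2.1 = pvWrap n e.1›] at hv''; rwa [h2])
        · exact Or.inr (Or.inl ⟨by rw [h2, ‹pvWrap n e.2.1 = pvWrap n e.1›], by simpa using hv''⟩)
      · exact Or.inl (by rwa [h2])
    · exact Or.inr (Or.inr ⟨h2, by simpa using hv'⟩)
  · rw [if_neg h2] at hv
    split at hv
    · rcases List.mem_append.1 hv with hv' | hv'
      · exact Or.inl (by rwa [‹u = pvWrap n e.1›])
      · exact Or.inr (Or.inl ⟨‹u = pvWrap n e.1›, by simpa using hv'⟩)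
    · exact Or.inl hv

theorem pvBuildG_memAux (n : Int) :
    ∀ (l : List (Int × Int × Int × String)) (G0 : PVG) (u : Int) (v : Int × Int × Int),
      v ∈ (l.foldl (pvGStep n) G0).getD u [] →
      v ∈ G0.getD u [] ∨ ∃ e ∈ l,
        (u = pvWrap n e.1 ∧ v = (e.2.1, e.2.2.1, pvTid e.2.2.2)) ∨
        (u = pvWrap n e.2.1 ∧ v = (e.1, e.2.2.1, pvTid e.2.2.2)) := by
  intro l
  induction l with
  | nil => intro G0 u v hv; exact Or.inl hv
  | cons e es ih =>
    intro G0 u v hv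
    simp only [List.foldl_cons] at hv
    rcases ih (pvGStep n G0 e) u v hv with hv' | ⟨f, hf, hff⟩
    · rcases pvGStep_sound n G0 e u v hv' with h | h
      · exact Or.inl h
      · exact Or.inr ⟨e, List.mem_cons_self .., h⟩
    · exact Or.inr ⟨f, List.mem_cons_of_mem _ hf, hff⟩

theorem pvBuildG_mem (n : Int) (E : List (Int × Int × Int × String)) (u : Int)
    (v : Int × Int × Int) (hv : v ∈ (pvBuildG n E).getD u []) :
    pvLEdge (pvNormE n E) u (pvWrap n v.1, v.2.1, v.2.2) := by
  rw [pvBuildG_eq] at hv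
  rcases pvBuildG_memAux n E PySem.Dict.empty u v hv with h | ⟨e, he, hcase⟩
  · rw [PySem.Dict.getD_empty] at h; cases h
  · refine ⟨(pvWrap n e.1, pvWrap n e.2.1, e.2.2.1, e.2.2.2),
      List.mem_map.2 ⟨e, he, rfl⟩, ?_⟩
    rcases hcase with ⟨h1, h2⟩ | ⟨h1, h2⟩ <;> subst h2
    · exact Or.inl ⟨h1, rfl⟩
    · exact Or.inr ⟨h1, rfl⟩

theorem pvFoldG_mono (n : Int) (l : List (Int × Int × Int × String)) (G0 : PVG) (u : Int)
    (v : Int × Int × Int) (hv : v ∈ G0.getD u []) :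
    v ∈ (l.foldl (pvGStep n) G0).getD u [] := by
  induction l generalizing G0 with
  | nil => exact hv
  | cons e es ih => exact ih (pvGStep n G0 e) (pvGStep_mono n G0 e u v hv)

theorem pvGStep_self (n : Int) (G : PVG) (e : Int × Int × Int × String) :
    (e.2.1, e.2.2.1, pvTid e.2.2.2) ∈ (pvGStep n G e).getD (pvWrap n e.1) [] ∧
    (e.1, e.2.2.1, pvTid e.2.2.2) ∈ (pvGStep n G e).getD (pvWrap n e.2.1) [] := by
  constructor
  · unfold pvGStep
    simp only [PySem.Dict.getD_insert]
    split
    · rename_i h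
      rw [if_pos h.symm]
      simp
    · simp
  · unfold pvGStep
    simp only [PySem.Dict.getD_insert]
    simp

theorem pvBuildG_mem2 (n : Int) (E : List (Int × Int × Int × String))
    (e : Int × Int × Int × String) (he : e ∈ E) :
    (e.2.1, e.2.2.1, pvTid e.2.2.2) ∈ (pvBuildG n E).getD (pvWrap n e.1) [] ∧
    (e.1, e.2.2.1, pvTid e.2.2.2) ∈ (pvBuildG n E).getD (pvWrap n e.2.1) [] := by
  obtain ⟨l1, l2, hEeq⟩ := List.append_of_mem he
  have hself := pvGStep_self n (l1.foldl (pvGStep n) PySem.Dict.empty) e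
  have hfold : pvBuildG n E =
      l2.foldl (pvGStep n) (pvGStep n (l1.foldl (pvGStep n) PySem.Dict.empty) e) := by
    rw [pvBuildG_eq, hEeq, List.foldl_append, List.foldl_cons]
  rw [hfold]
  exact ⟨pvFoldG_mono n l2 _ _ _ hself.1, pvFoldG_mono n l2 _ _ _ hself.2⟩

def pvQInv (n : Int) (E : List (Int × Int × Int × String)) (S : Int)
    (q : List (Int × Int × Int)) (d : PVD) : Prop :=
  ∀ en ∈ q, pvReach E S (pvWrap n en.2.1, en.2.2) en.1 ∧
    ∃ du, d.get? (pvWrap n en.2.1, en.2.2) = some du ∧ du ≤ en.1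

def pvRelaxedE (E : List (Int × Int × Int × String)) (d : PVD) (u t du : Int) : Prop :=
  (∀ e ∈ E, e.1 = u → pvOLe (d.get? (e.2.1, pvTid e.2.2.2))
      (du + pvCost t (pvTid e.2.2.2) + e.2.2.1)) ∧
  (∀ e ∈ E, e.2.1 = u → pvOLe (d.get? (e.1, pvTid e.2.2.2))
      (du + pvCost t (pvTid e.2.2.2) + e.2.2.1))

def pvRQ (n : Int) (E : List (Int × Int × Int × String)) (q : List (Int × Int × Int))
    (d : PVD) : Prop :=
  ∀ s du, d.get? s = some du →
    (∃ w, (du, w, s.2) ∈ q ∧ pvWrap n w = s.1) ∨ pvRelaxedE E d s.1 s.2 du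

def pvInvA (n : Int) (SS : List (Int × Int)) (E : List (Int × Int × Int × String)) (S : Int)
    (q : List (Int × Int × Int)) (d : PVD) : Prop :=
  pvSound E S d ∧ pvKB SS E d ∧ pvSeedUp E S d ∧ pvQInv n E S q d ∧ pvRQ n E q d

theorem pvQMin_aux (xs : List (Int × Int × Int)) :
    ∀ x, xs.foldl (fun m y => if pvLtb y m then y else m) x ∈ x :: xs := by
  induction xs with
  | nil => intro x; simp
  | cons y ys ih =>
    intro x
    simp only [List.foldl_cons]
    rcases List.mem_cons.1 (ih (if pvLtb y x then y else x)) with h | h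
    · rw [h]; split <;> simp
    · simp [h]

theorem pvQMin_mem (q : List (Int × Int × Int)) (e : Int × Int × Int)
    (h : pvQMin q = some e) : e ∈ q := by
  cases q with
  | nil => simp [pvQMin] at h
  | cons x xs =>
    simp only [pvQMin, Option.some.injEq] at h
    rw [← h]; exact pvQMin_aux xs x

theorem pvQMin_none (q : List (Int × Int × Int)) (h : pvQMin q = none) : q = [] := by
  cases q with
  | nil => rfl
  | cons x xs => simp [pvQMin] at h

theorem pvReach_nonneg (E : List (Int × Int × Int × String)) (S : Int)
    (hd : ∀ e ∈ E, -5 ≤ e.2.2.1) (s : Int × Int) (c : Int) (h : pvReach E S s c) :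
    -pvS0 E ≤ c := by
  induction h with
  | seedx e he _ => exact pvd_ge_negS0 E e he
  | seedy e he _ => exact pvd_ge_negS0 E e he
  | stepx e he t0 c _ ih => have := pvCost_pos t0 (pvTid e.2.2.2); have := hd e he; omega
  | stepy e he t0 c _ ih => have := pvCost_pos t0 (pvTid e.2.2.2); have := hd e he; omega

theorem pvSeedsPre_mem_x (E : List (Int × Int × Int × String)) (A : Int)
    (e : Int × Int × Int × String) (he : e ∈ E) (hx : e.1 = A) :
    ((e.2.1, pvTid e.2.2.2), e.2.2.1) ∈ pvSeedsPre E A :=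
  List.mem_flatMap.2 ⟨e, he, by simp [hx]⟩

theorem pvSeedsPre_mem_y (E : List (Int × Int × Int × String)) (A : Int)
    (e : Int × Int × Int × String) (he : e ∈ E) (hy : e.2.1 = A) :
    ((e.1, pvTid e.2.2.2), e.2.2.1) ∈ pvSeedsPre E A :=
  List.mem_flatMap.2 ⟨e, he, by simp [hy]⟩

theorem pvLEdge_seed (E : List (Int × Int × Int × String)) (A : Int) (v : Int × Int × Int)
    (hv : pvLEdge E A v) : ((v.1, v.2.2), v.2.1) ∈ pvSeedsPre E A := by
  obtain ⟨e, he, hc⟩ := hv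
  rcases hc with ⟨h1, h2⟩ | ⟨h1, h2⟩ <;> subst h2
  · exact pvSeedsPre_mem_x E A e he h1.symm
  · exact pvSeedsPre_mem_y E A e he h1.symm

theorem pvLEdge_facts (E : List (Int × Int × Int × String)) (A : Int) (v : Int × Int × Int)
    (hnn : ∀ e ∈ E, 0 ≤ e.1 ∧ 0 ≤ e.2.1 ∧ -5 ≤ e.2.2.1) (hv : pvLEdge E A v) :
    0 ≤ v.1 ∧ -pvS0 E ≤ v.2.1 ∧ v.2.1 ≤ pvS0 E ∧ (v.1, v.2.2) ∈ pvStatesB E ∧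
    pvReach E A (v.1, v.2.2) v.2.1 := by
  obtain ⟨e, he, hc⟩ := hv
  rcases hc with ⟨h1, h2⟩ | ⟨h1, h2⟩ <;> subst h2
  · exact ⟨(hnn e he).2.1, pvd_ge_negS0 E e he, pvd_le_S0 E e he, pvStatesB_mem_x E e he,
      pvReach.seedx e he h1.symm⟩
  · exact ⟨(hnn e he).1, pvd_ge_negS0 E e he, pvd_le_S0 E e he, pvStatesB_mem_y E e he,
      pvReach.seedy e he h1.symm⟩

-- the seed-fold invariant bundle
def pvSeedP (n : Int) (E : List (Int × Int × Int × String)) (A : Int)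
    (acc : List (Int × Int × Int) × PVD) : Prop :=
  pvSound E A acc.2 ∧ pvKB (pvStatesB E) E acc.2 ∧
  (∀ s du, acc.2.get? s = some du → (s, du) ∈ pvSeedsPre E A) ∧
  (∀ en ∈ acc.1, acc.2.get? (pvWrap n en.2.1, en.2.2) = some en.1) ∧
  (∀ s du, acc.2.get? s = some du → ∃ w, (du, w, s.2) ∈ acc.1 ∧ pvWrap n w = s.1)

theorem pvSeedFold_present (n : Int) :
    ∀ (l : List (Int × Int × Int)) (acc : List (Int × Int × Int) × PVD) (s : Int × Int)
      (du : Int), acc.2.get? s = some du →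
      ∃ du', (l.foldl (fun qd v =>
        (qd.1 ++ [(v.2.1, v.1, v.2.2)], qd.2.insert (pvWrap n v.1, v.2.2) v.2.1)) acc).2.get? s
        = some du' := by
  intro l
  induction l with
  | nil => intro acc s du h; exact ⟨du, h⟩
  | cons v vs ih =>
    intro acc s du h
    simp only [List.foldl_cons]
    by_cases hs : s = (pvWrap n v.1, v.2.2)
    · exact ih _ s v.2.1 (by rw [PySem.Dict.get?_insert, if_pos hs])
    · exact ih _ s du (by rw [PySem.Dict.get?_insert, if_neg hs]; exact h)

theorem pvSeedFold_inv (n : Int) (E : List (Int × Int × Int × String)) (A : Int)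
    (hnn : ∀ e ∈ E, 0 ≤ e.1 ∧ 0 ≤ e.2.1 ∧ -5 ≤ e.2.2.1)
    (huniq : ∀ p ∈ pvSeedsPre E A, ∀ q ∈ pvSeedsPre E A, p.1 = q.1 → p.2 = q.2) :
    ∀ (l : List (Int × Int × Int)) (acc : List (Int × Int × Int) × PVD),
      (∀ v ∈ l, pvLEdge E A (pvWrap n v.1, v.2.1, v.2.2)) → pvSeedP n E A acc →
      pvSeedP n E A (l.foldl (fun qd v =>
        (qd.1 ++ [(v.2.1, v.1, v.2.2)], qd.2.insert (pvWrap n v.1, v.2.2) v.2.1)) acc) ∧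
      (∀ v ∈ l, ∃ du, (l.foldl (fun qd v =>
        (qd.1 ++ [(v.2.1, v.1, v.2.2)], qd.2.insert (pvWrap n v.1, v.2.2) v.2.1)) acc).2.get?
          (pvWrap n v.1, v.2.2) = some du) := by
  have hW := pvW_pos E
  intro l
  induction l with
  | nil => intro acc _ hP; exact ⟨hP, by simp⟩
  | cons v vs ih =>
    intro acc hl hP
    obtain ⟨hS, hKB, hSV, hQ, hw⟩ := hP
    obtain ⟨_, hd0, hdS, hmem, hreach⟩ :=
      pvLEdge_facts E A (pvWrap n v.1, v.2.1, v.2.2) hnn (hl v (List.mem_cons_self ..))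
    have hseedmem : ((pvWrap n v.1, v.2.2), v.2.1) ∈ pvSeedsPre E A :=
      pvLEdge_seed E A (pvWrap n v.1, v.2.1, v.2.2) (hl v (List.mem_cons_self ..))
    -- one step
    have hstep : pvSeedP n E A
        (acc.1 ++ [(v.2.1, v.1, v.2.2)], acc.2.insert (pvWrap n v.1, v.2.2) v.2.1) := by
      cases hg : acc.2.get? (pvWrap n v.1, v.2.2) with
      | none =>
        have hins := pvInsert_step (pvStatesB E) E acc.2 (pvWrap n v.1, v.2.2) v.2.1
          hKB hmem hd0 hW (Or.inl ⟨hg, by nlinarith⟩)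
        refine ⟨?_, hins.1, ?_, ?_, ?_⟩
        · intro s w hw'
          rw [PySem.Dict.get?_insert] at hw'
          split at hw'
          · cases hw'; subst ‹s = (pvWrap n v.1, v.2.2)›; exact hreach
          · exact hS s w hw'
        · intro s du h
          rw [PySem.Dict.get?_insert] at h
          split at h
          · cases h; subst ‹s = (pvWrap n v.1, v.2.2)›; exact hseedmem
          · exact hSV s du h
        · intro en hen
          rcases List.mem_append.1 hen with hen' | hen'
          · have h2 := hQ en hen'
            rw [PySem.Dict.get?_insert]
            split
            · rw [← ‹(pvWrap n en.2.1, en.2.2) = (pvWrap n v.1, v.2.2)›] at hg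
              rw [hg] at h2; cases h2
            · exact h2
          · simp only [List.mem_singleton] at hen'
            subst hen'
            rw [PySem.Dict.get?_insert]; simp
        · intro s du h
          rw [PySem.Dict.get?_insert] at h
          split at h
          · cases h; subst ‹s = (pvWrap n v.1, v.2.2)›
            exact ⟨v.1, List.mem_append_right _ (by simp), rfl⟩
          · obtain ⟨w, hwm, hww⟩ := hw s du h
            exact ⟨w, List.mem_append_left _ hwm, hww⟩
      | some cur =>
        have hcur : cur = v.2.1 :=
          huniq _ (hSV _ cur hg) _ hseedmem rfl
        have hsame : ∀ s, (acc.2.insert (pvWrap n v.1, v.2.2) v.2.1).get? s = acc.2.get? s := by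
          intro s
          rw [PySem.Dict.get?_insert]
          split
          · rw [‹s = (pvWrap n v.1, v.2.2)›, hg, hcur]
          · rfl
        have hKB' : pvKB (pvStatesB E) E (acc.2.insert (pvWrap n v.1, v.2.2) v.2.1) := by
          have hsz : (acc.2.insert (pvWrap n v.1, v.2.2) v.2.1).size = acc.2.size := by
            rw [PySem.Dict.size_insert, if_pos]
            rw [PySem.Dict.contains_iff_mem_keys]
            by_contra hc
            rw [← PySem.Dict.get?_eq_none_iff_not_mem_keys] at hc
            rw [hc] at hg; cases hg
          refine ⟨PySem.Dict.nodup_keys_insert _ _ _ hKB.1, ?_, ?_⟩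
          · intro s hs
            rcases (PySem.Dict.mem_keys_insert _ _ s _).1 hs with rfl | hs'
            · exact hmem
            · exact hKB.2.1 s hs'
          · intro s w hw'
            rw [hsame] at hw'
            rw [hsz]
            exact hKB.2.2 s w hw'
        refine ⟨fun s w hw' => hS s w (by rwa [hsame] at hw'), hKB',
          fun s du h => hSV s du (by rwa [hsame] at h), ?_, ?_⟩
        · intro en hen
          rcases List.mem_append.1 hen with hen' | hen'
          · have h2 := hQ en hen'
            rw [hsame]; exact h2
          · simp only [List.mem_singleton] at hen'
            subst hen'
            rw [hsame, hg, hcur]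
        · intro s du h
          rw [hsame] at h
          obtain ⟨w, hwm, hww⟩ := hw s du h
          exact ⟨w, List.mem_append_left _ hwm, hww⟩
    have hrest := ih (acc.1 ++ [(v.2.1, v.1, v.2.2)], acc.2.insert (pvWrap n v.1, v.2.2) v.2.1)
      (fun w hw' => hl w (List.mem_cons_of_mem _ hw')) hstep
    constructor
    · simpa only [List.foldl_cons] using hrest.1
    · intro w hwmem
      rcases List.mem_cons.1 hwmem with rfl | hwmem'
      · have hpres := pvSeedFold_present n vs
          (acc.1 ++ [(w.2.1, w.1, w.2.2)], acc.2.insert (pvWrap n w.1, w.2.2) w.2.1)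
          (pvWrap n w.1, w.2.2) w.2.1 (by rw [PySem.Dict.get?_insert]; simp)
        simpa only [List.foldl_cons] using hpres
      · have := hrest.2 w hwmem'
        simpa only [List.foldl_cons] using this

theorem pvInitA (n : Int) (E : List (Int × Int × Int × String)) (A : Int)
    (hnn : ∀ en ∈ pvNormE n E, 0 ≤ en.1 ∧ 0 ≤ en.2.1 ∧ -5 ≤ en.2.2.1)
    (huniq : ∀ p ∈ pvSeedsPre (pvNormE n E) (pvWrap n A),
      ∀ q ∈ pvSeedsPre (pvNormE n E) (pvWrap n A), p.1 = q.1 → p.2 = q.2) :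
    pvInvA n (pvStatesB (pvNormE n E)) (pvNormE n E) (pvWrap n A)
      (pvSeedFold n ((pvBuildG n E).getD (pvWrap n A) [])).1
      (pvSeedFold n ((pvBuildG n E).getD (pvWrap n A) [])).2 := by
  have hL : ∀ v ∈ (pvBuildG n E).getD (pvWrap n A) [],
      pvLEdge (pvNormE n E) (pvWrap n A) (pvWrap n v.1, v.2.1, v.2.2) :=
    fun v hv => pvBuildG_mem n E (pvWrap n A) v hv
  have hP0 : pvSeedP n (pvNormE n E) (pvWrap n A) ([], PySem.Dict.empty) := by
    refine ⟨?_, pvKB_empty _ (pvNormE n E), ?_, by simp, ?_⟩ <;>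
      intro s du h <;> rw [PySem.Dict.get?_empty] at h <;> cases h
  have hmain := pvSeedFold_inv n (pvNormE n E) (pvWrap n A) hnn huniq
    ((pvBuildG n E).getD (pvWrap n A) []) ([], PySem.Dict.empty) hL hP0
  obtain ⟨⟨hS, hKB, hSV, hQ, hw⟩, hpres⟩ := hmain
  have hfold : pvSeedFold n ((pvBuildG n E).getD (pvWrap n A) []) =
      ((pvBuildG n E).getD (pvWrap n A) []).foldl (fun qd v =>
        (qd.1 ++ [(v.2.1, v.1, v.2.2)], qd.2.insert (pvWrap n v.1, v.2.2) v.2.1))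
        ([], PySem.Dict.empty) := rfl
  rw [hfold]
  refine ⟨hS, hKB, ⟨?_, ?_⟩, ?_, ?_⟩
  · -- seed upper bounds, x direction
    intro en hen hx
    obtain ⟨e, he, rfl⟩ := List.mem_map.1 hen
    have hmem2 := (pvBuildG_mem2 n E e he).1
    rw [show pvWrap n e.1 = pvWrap n A from hx] at hmem2
    obtain ⟨du, hdu⟩ := hpres _ hmem2
    have hval := huniq _ (hSV _ du hdu) _
      (pvSeedsPre_mem_x (pvNormE n E) (pvWrap n A) _ hen hx) rfl
    exact ⟨du, hdu, le_of_eq hval⟩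
  · intro en hen hy
    obtain ⟨e, he, rfl⟩ := List.mem_map.1 hen
    have hmem2 := (pvBuildG_mem2 n E e he).2
    rw [show pvWrap n e.2.1 = pvWrap n A from hy] at hmem2
    obtain ⟨du, hdu⟩ := hpres _ hmem2
    have hval := huniq _ (hSV _ du hdu) _
      (pvSeedsPre_mem_y (pvNormE n E) (pvWrap n A) _ hen hy) rfl
    exact ⟨du, hdu, le_of_eq hval⟩
  · -- queue invariant
    intro en hen
    have h2 := hQ en hen
    exact ⟨hS _ _ h2, en.1, h2, le_refl _⟩
  · -- every key has a live queue witness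
    intro s du h
    exact Or.inl (hw s du h)

theorem pvQInv_mono (n : Int) (E : List (Int × Int × Int × String)) (S : Int)
    (q : List (Int × Int × Int)) (d d' : PVD) (h : pvDLe d' d) (hQ : pvQInv n E S q d) :
    pvQInv n E S q d' := by
  intro en hen
  obtain ⟨h2, du, hdu, hle⟩ := hQ en hen
  obtain ⟨du', hdu', hle'⟩ := h _ du hdu
  exact ⟨h2, du', hdu', le_trans hle' hle⟩

theorem pvRelaxedE_mono (E : List (Int × Int × Int × String)) (d d' : PVD) (u t du : Int)
    (h : pvDLe d' d) (hR : pvRelaxedE E d u t du) : pvRelaxedE E d' u t du :=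
  ⟨fun e he hx => pvDLe_OLe _ _ h _ _ (hR.1 e he hx),
   fun e he hy => pvDLe_OLe _ _ h _ _ (hR.2 e he hy)⟩

theorem pvLEdge_step_facts (E : List (Int × Int × Int × String)) (S u t time : Int)
    (v : Int × Int × Int)
    (hnn : ∀ e ∈ E, 0 ≤ e.1 ∧ 0 ≤ e.2.1 ∧ -5 ≤ e.2.2.1) (hLv : pvLEdge E u v)
    (hreach : pvReach E S (u, t) time) :
    0 ≤ v.1 ∧ -pvS0 E ≤ v.2.1 ∧ v.2.1 ≤ pvS0 E ∧ (v.1, v.2.2) ∈ pvStatesB E ∧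
    pvReach E S (v.1, v.2.2) (pvCost t v.2.2 + v.2.1 + time) := by
  obtain ⟨e, he, hc⟩ := hLv
  rcases hc with ⟨h1, h2⟩ | ⟨h1, h2⟩ <;> subst h2
  · have hr := pvReach.stepx e he t time (h1 ▸ hreach)
    refine ⟨(hnn e he).2.1, pvd_ge_negS0 E e he, pvd_le_S0 E e he, pvStatesB_mem_x E e he, ?_⟩
    have : pvCost t (pvTid e.2.2.2) + e.2.2.1 + time =
        time + pvCost t (pvTid e.2.2.2) + e.2.2.1 := by ring
    rw [this]
    exact hr
  · have hr := pvReach.stepy e he t time (h1 ▸ hreach)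
    refine ⟨(hnn e he).1, pvd_ge_negS0 E e he, pvd_le_S0 E e he, pvStatesB_mem_y E e he, ?_⟩
    have : pvCost t (pvTid e.2.2.2) + e.2.2.1 + time =
        time + pvCost t (pvTid e.2.2.2) + e.2.2.1 := by ring
    rw [this]
    exact hr

-- ---------- port B: Bellman-Ford sweeps ----------
theorem pvStepB (E : List (Int × Int × Int × String)) (S n : Int) (st : PVD × Bool)
    (u : Int) (en : Int × Int × Int) (t0 : Int)
    (hLe : pvLEdge E u (pvWrap n en.1, en.2.1, en.2.2))
    (hnn : ∀ e ∈ E, 0 ≤ e.1 ∧ 0 ≤ e.2.1 ∧ -5 ≤ e.2.2.1)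
    (hS : pvSound E S st.1) (hKB : pvKB (pvStatesB E) E st.1) :
    (pvSound E S (pvRelaxStepB n st u en t0).1 ∧
      pvKB (pvStatesB E) E (pvRelaxStepB n st u en t0).1) ∧
    pvDLe (pvRelaxStepB n st u en t0).1 st.1 ∧
    pvPhi (pvK (pvStatesB E) E) (pvS0 E) (pvStatesB E) (pvRelaxStepB n st u en t0).1 ≤
      pvPhi (pvK (pvStatesB E) E) (pvS0 E) (pvStatesB E) st.1 ∧
    ((pvRelaxStepB n st u en t0).2 = true → st.2 = true ∨
      pvPhi (pvK (pvStatesB E) E) (pvS0 E) (pvStatesB E) (pvRelaxStepB n st u en t0).1 <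
        pvPhi (pvK (pvStatesB E) E) (pvS0 E) (pvStatesB E) st.1) := by
  cases hg : st.1.get? (u, t0) with
  | none =>
    have hst' : pvRelaxStepB n st u en t0 = st := by simp [pvRelaxStepB, hg]
    rw [hst']
    exact ⟨⟨hS, hKB⟩, pvDLe_refl _, le_refl _, fun h => Or.inl h⟩
  | some du =>
    have hduB : du ≤ pvS0 E + st.1.size * pvW E := (hKB.2.2 _ du hg).2
    have hcost1 := pvCost_pos t0 en.2.2
    have hcost2 := pvCost_le t0 en.2.2
    have hd : ∀ e ∈ E, -5 ≤ e.2.2.1 := fun e he => (hnn e he).2.2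
    obtain ⟨_, hd0, hdS, hkmem, hreach⟩ :=
      pvLEdge_step_facts E S u t0 du (pvWrap n en.1, en.2.1, en.2.2) hnn hLe (hS _ du hg)
    have heq : pvCost t0 en.2.2 + en.2.1 + du = du + pvCost t0 en.2.2 + en.2.1 := by ring
    rw [heq] at hreach
    have hnv0 : -pvS0 E ≤ du + pvCost t0 en.2.2 + en.2.1 :=
      pvReach_nonneg E S hd _ _ hreach
    have hW := pvW_pos E
    have hSound' : pvSound E S
        (st.1.insert (pvWrap n en.1, en.2.2) (du + pvCost t0 en.2.2 + en.2.1)) := by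
      intro s w hw
      rw [PySem.Dict.get?_insert] at hw
      split at hw
      · cases hw; subst ‹s = (pvWrap n en.1, en.2.2)›; exact hreach
      · exact hS s w hw
    cases hc : st.1.get? (pvWrap n en.1, en.2.2) with
    | none =>
      have hst' : pvRelaxStepB n st u en t0 =
          (st.1.insert (pvWrap n en.1, en.2.2) (du + pvCost t0 en.2.2 + en.2.1), true) := by
        simp [pvRelaxStepB, hg, hc]
      have hins := pvInsert_step (pvStatesB E) E st.1 (pvWrap n en.1, en.2.2)
        (du + pvCost t0 en.2.2 + en.2.1) hKB hkmem hnv0 hW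
        (Or.inl ⟨hc, by unfold pvW at *; linarith⟩)
      rw [hst']
      exact ⟨⟨hSound', hins.1⟩, hins.2.1, le_of_lt hins.2.2, fun _ => Or.inr hins.2.2⟩
    | some cur =>
      by_cases hlt : du + pvCost t0 en.2.2 + en.2.1 < cur
      · have hst' : pvRelaxStepB n st u en t0 =
            (st.1.insert (pvWrap n en.1, en.2.2) (du + pvCost t0 en.2.2 + en.2.1), true) := by
          simp [pvRelaxStepB, hg, hc, hlt]
        have hins := pvInsert_step (pvStatesB E) E st.1 (pvWrap n en.1, en.2.2)
          (du + pvCost t0 en.2.2 + en.2.1) hKB hkmem hnv0 hW (Or.inr ⟨cur, hc, hlt⟩)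
        rw [hst']
        exact ⟨⟨hSound', hins.1⟩, hins.2.1, le_of_lt hins.2.2, fun _ => Or.inr hins.2.2⟩
      · have hst' : pvRelaxStepB n st u en t0 = st := by
          simp [pvRelaxStepB, hg, hc, hlt]
        rw [hst']
        exact ⟨⟨hS, hKB⟩, pvDLe_refl _, le_refl _, fun h => Or.inl h⟩

theorem pvStepB_flagMono (n : Int) (st : PVD × Bool) (u : Int) (en : Int × Int × Int)
    (t0 : Int) (h : st.2 = true) : (pvRelaxStepB n st u en t0).2 = true := by
  cases hg : st.1.get? (u, t0) with
  | none => simp [pvRelaxStepB, hg, h]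
  | some du =>
    cases hc : st.1.get? (pvWrap n en.1, en.2.2) with
    | none => simp [pvRelaxStepB, hg, hc]
    | some cur =>
      by_cases hlt : du + pvCost t0 en.2.2 + en.2.1 < cur <;>
        simp [pvRelaxStepB, hg, hc, hlt, h]

theorem pvStepB_false (n : Int) (st : PVD × Bool) (u : Int) (en : Int × Int × Int) (t0 : Int)
    (h : (pvRelaxStepB n st u en t0).2 = false) :
    pvRelaxStepB n st u en t0 = st ∧ pvRelCond st.1 u (pvWrap n en.1) en.2.1 en.2.2 t0 := by
  cases hg : st.1.get? (u, t0) with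
  | none =>
    refine ⟨by simp [pvRelaxStepB, hg], ?_⟩
    intro du hdu; rw [hg] at hdu; cases hdu
  | some du =>
    cases hc : st.1.get? (pvWrap n en.1, en.2.2) with
    | none => simp [pvRelaxStepB, hg, hc] at h
    | some cur =>
      by_cases hlt : du + pvCost t0 en.2.2 + en.2.1 < cur
      · simp [pvRelaxStepB, hg, hc, hlt] at h
      · refine ⟨by simp [pvRelaxStepB, hg, hc, hlt], ?_⟩
        intro du' hdu'
        rw [hg] at hdu'; cases hdu'
        exact ⟨cur, hc, by omega⟩

theorem pvEdgeSweep_eq (n : Int) (st : PVD × Bool) (u : Int) (en : Int × Int × Int) :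
    pvEdgeSweep n st u en = pvRelaxStepB n (pvRelaxStepB n st u en 0) u en 1 := rfl

theorem pvEdgeSweep_props (E : List (Int × Int × Int × String)) (S n : Int) (st : PVD × Bool)
    (u : Int) (en : Int × Int × Int)
    (hLe : pvLEdge E u (pvWrap n en.1, en.2.1, en.2.2))
    (hnn : ∀ e ∈ E, 0 ≤ e.1 ∧ 0 ≤ e.2.1 ∧ -5 ≤ e.2.2.1)
    (hS : pvSound E S st.1) (hKB : pvKB (pvStatesB E) E st.1) :
    (pvSound E S (pvEdgeSweep n st u en).1 ∧ pvKB (pvStatesB E) E (pvEdgeSweep n st u en).1) ∧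
    pvDLe (pvEdgeSweep n st u en).1 st.1 ∧
    pvPhi (pvK (pvStatesB E) E) (pvS0 E) (pvStatesB E) (pvEdgeSweep n st u en).1 ≤
      pvPhi (pvK (pvStatesB E) E) (pvS0 E) (pvStatesB E) st.1 ∧
    ((pvEdgeSweep n st u en).2 = true → st.2 = true ∨
      pvPhi (pvK (pvStatesB E) E) (pvS0 E) (pvStatesB E) (pvEdgeSweep n st u en).1 <
        pvPhi (pvK (pvStatesB E) E) (pvS0 E) (pvStatesB E) st.1) := by
  have h0 := pvStepB E S n st u en 0 hLe hnn hS hKB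
  have h1 := pvStepB E S n (pvRelaxStepB n st u en 0) u en 1 hLe hnn h0.1.1 h0.1.2
  rw [pvEdgeSweep_eq]
  refine ⟨h1.1, pvDLe_trans _ _ _ h1.2.1 h0.2.1, ?_, ?_⟩
  · have a1 := h1.2.2.1; have a2 := h0.2.2.1; omega
  · intro hfl
    have a1 := h1.2.2.1; have a2 := h0.2.2.1
    rcases h1.2.2.2 hfl with h | h
    · rcases h0.2.2.2 h with h' | h'
      · exact Or.inl h'
      · exact Or.inr (by omega)
    · exact Or.inr (by omega)

theorem pvEdgeSweep_false (n : Int) (st : PVD × Bool) (u : Int) (en : Int × Int × Int)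
    (h : (pvEdgeSweep n st u en).2 = false) :
    st.2 = false ∧ pvEdgeSweep n st u en = st ∧
    ∀ t0 : Int, (t0 = 0 ∨ t0 = 1) → pvRelCond st.1 u (pvWrap n en.1) en.2.1 en.2.2 t0 := by
  rw [pvEdgeSweep_eq] at h
  have hst0f : (pvRelaxStepB n st u en 0).2 = false := by
    by_contra hb
    have := pvStepB_flagMono n (pvRelaxStepB n st u en 0) u en 1
      (by revert hb; cases (pvRelaxStepB n st u en 0).2 <;> simp)
    rw [this] at h; cases h
  obtain ⟨heq0, hc0⟩ := pvStepB_false n st u en 0 hst0f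
  rw [heq0] at h
  obtain ⟨heq1, hc1⟩ := pvStepB_false n st u en 1 h
  have hflag : st.2 = false := by rw [heq0] at hst0f; exact hst0f
  refine ⟨hflag, ?_, ?_⟩
  · rw [pvEdgeSweep_eq, heq0, heq1]
  · intro t0 ht0
    rcases ht0 with rfl | rfl
    · exact hc0
    · exact hc1

theorem pvAdjFold_props (E : List (Int × Int × Int × String)) (S n : Int) (u : Int)
    (hnn : ∀ e ∈ E, 0 ≤ e.1 ∧ 0 ≤ e.2.1 ∧ -5 ≤ e.2.2.1) :
    ∀ (L : List (Int × Int × Int)) (st : PVD × Bool),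
      (∀ en ∈ L, pvLEdge E u (pvWrap n en.1, en.2.1, en.2.2)) →
      pvSound E S st.1 → pvKB (pvStatesB E) E st.1 →
      (pvSound E S (L.foldl (fun st en => pvEdgeSweep n st u en) st).1 ∧
        pvKB (pvStatesB E) E (L.foldl (fun st en => pvEdgeSweep n st u en) st).1) ∧
      pvDLe (L.foldl (fun st en => pvEdgeSweep n st u en) st).1 st.1 ∧
      pvPhi (pvK (pvStatesB E) E) (pvS0 E) (pvStatesB E)
          (L.foldl (fun st en => pvEdgeSweep n st u en) st).1 ≤
        pvPhi (pvK (pvStatesB E) E) (pvS0 E) (pvStatesB E) st.1 ∧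
      ((L.foldl (fun st en => pvEdgeSweep n st u en) st).2 = true → st.2 = true ∨
        pvPhi (pvK (pvStatesB E) E) (pvS0 E) (pvStatesB E)
            (L.foldl (fun st en => pvEdgeSweep n st u en) st).1 <
          pvPhi (pvK (pvStatesB E) E) (pvS0 E) (pvStatesB E) st.1) := by
  intro L
  induction L with
  | nil =>
    intro st _ hS hKB
    exact ⟨⟨hS, hKB⟩, pvDLe_refl _, le_refl _, fun h => Or.inl (by simpa using h)⟩
  | cons en ens ih =>
    intro st hL hS hKB
    have h0 := pvEdgeSweep_props E S n st u en (hL en (List.mem_cons_self ..)) hnn hS hKB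
    simp only [List.foldl_cons]
    have h1 := ih (pvEdgeSweep n st u en) (fun f hf => hL f (List.mem_cons_of_mem _ hf))
      h0.1.1 h0.1.2
    refine ⟨h1.1, pvDLe_trans _ _ _ h1.2.1 h0.2.1, ?_, ?_⟩
    · have a1 := h1.2.2.1; have a2 := h0.2.2.1; omega
    · intro hfl
      have a1 := h1.2.2.1; have a2 := h0.2.2.1
      rcases h1.2.2.2 hfl with h | h
      · rcases h0.2.2.2 h with h' | h'
        · exact Or.inl h'
        · exact Or.inr (by omega)
      · exact Or.inr (by omega)

theorem pvAdjFold_false (n : Int) (u : Int) :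
    ∀ (L : List (Int × Int × Int)) (st : PVD × Bool),
      (L.foldl (fun st en => pvEdgeSweep n st u en) st).2 = false →
      st.2 = false ∧ L.foldl (fun st en => pvEdgeSweep n st u en) st = st ∧
      ∀ en ∈ L, ∀ t0 : Int, (t0 = 0 ∨ t0 = 1) →
        pvRelCond st.1 u (pvWrap n en.1) en.2.1 en.2.2 t0 := by
  intro L
  induction L with
  | nil =>
    intro st h
    exact ⟨by simpa using h, by simp, by simp⟩
  | cons en ens ih =>
    intro st h
    simp only [List.foldl_cons] at h ⊢
    obtain ⟨h2, hpass, hconds⟩ := ih _ h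
    obtain ⟨hflag, heq, hc⟩ := pvEdgeSweep_false n st u en h2
    rw [heq] at hpass hconds
    refine ⟨hflag, by rw [heq]; exact hpass, ?_⟩
    intro en' hen' t0 ht0
    rcases List.mem_cons.1 hen' with rfl | hmem
    · exact hc t0 ht0
    · exact hconds en' hmem t0 ht0

theorem pvNodeSweep_eq (n : Int) (G : PVG) (st : PVD × Bool) (u : Int) :
    pvNodeSweep n G st u = (G.getD u []).foldl (fun st en => pvEdgeSweep n st u en) st := rfl

theorem pvUsFold_props (E : List (Int × Int × Int × String)) (S n : Int) (G : PVG)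
    (hnn : ∀ e ∈ E, 0 ≤ e.1 ∧ 0 ≤ e.2.1 ∧ -5 ≤ e.2.2.1)
    (hGE : ∀ (u : Int), ∀ en ∈ G.getD u [], pvLEdge E u (pvWrap n en.1, en.2.1, en.2.2)) :
    ∀ (us : List Int) (st : PVD × Bool),
      pvSound E S st.1 → pvKB (pvStatesB E) E st.1 →
      (pvSound E S (us.foldl (fun st u => pvNodeSweep n G st u) st).1 ∧
        pvKB (pvStatesB E) E (us.foldl (fun st u => pvNodeSweep n G st u) st).1) ∧
      pvDLe (us.foldl (fun st u => pvNodeSweep n G st u) st).1 st.1 ∧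
      pvPhi (pvK (pvStatesB E) E) (pvS0 E) (pvStatesB E)
          (us.foldl (fun st u => pvNodeSweep n G st u) st).1 ≤
        pvPhi (pvK (pvStatesB E) E) (pvS0 E) (pvStatesB E) st.1 ∧
      ((us.foldl (fun st u => pvNodeSweep n G st u) st).2 = true → st.2 = true ∨
        pvPhi (pvK (pvStatesB E) E) (pvS0 E) (pvStatesB E)
            (us.foldl (fun st u => pvNodeSweep n G st u) st).1 <
          pvPhi (pvK (pvStatesB E) E) (pvS0 E) (pvStatesB E) st.1) := by
  intro us
  induction us with
  | nil =>
    intro st hS hKB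
    exact ⟨⟨hS, hKB⟩, pvDLe_refl _, le_refl _, fun h => Or.inl (by simpa using h)⟩
  | cons u us ih =>
    intro st hS hKB
    have h0 := pvAdjFold_props E S n u hnn (G.getD u []) st (hGE u) hS hKB
    rw [← pvNodeSweep_eq] at h0
    simp only [List.foldl_cons]
    have h1 := ih (pvNodeSweep n G st u) h0.1.1 h0.1.2
    refine ⟨h1.1, pvDLe_trans _ _ _ h1.2.1 h0.2.1, ?_, ?_⟩
    · have a1 := h1.2.2.1; have a2 := h0.2.2.1; omega
    · intro hfl
      have a1 := h1.2.2.1; have a2 := h0.2.2.1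
      rcases h1.2.2.2 hfl with h | h
      · rcases h0.2.2.2 h with h' | h'
        · exact Or.inl h'
        · exact Or.inr (by omega)
      · exact Or.inr (by omega)

theorem pvUsFold_false (n : Int) (G : PVG) :
    ∀ (us : List Int) (st : PVD × Bool),
      (us.foldl (fun st u => pvNodeSweep n G st u) st).2 = false →
      st.2 = false ∧ us.foldl (fun st u => pvNodeSweep n G st u) st = st ∧
      ∀ u ∈ us, ∀ en ∈ G.getD u [], ∀ t0 : Int, (t0 = 0 ∨ t0 = 1) →
        pvRelCond st.1 u (pvWrap n en.1) en.2.1 en.2.2 t0 := by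
  intro us
  induction us with
  | nil =>
    intro st h
    exact ⟨by simpa using h, by simp, by simp⟩
  | cons u us ih =>
    intro st h
    simp only [List.foldl_cons] at h ⊢
    obtain ⟨h2, hpass, hconds⟩ := ih _ h
    obtain ⟨hflag, heq0, hc⟩ := pvAdjFold_false n u (G.getD u []) st h2
    have heq : pvNodeSweep n G st u = st := by rw [pvNodeSweep_eq]; exact heq0
    rw [heq] at hpass hconds
    refine ⟨hflag, by rw [heq]; exact hpass, ?_⟩
    intro u' hu' en hen t0 ht0
    rcases List.mem_cons.1 hu' with rfl | hmem
    · exact hc en hen t0 ht0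
    · exact hconds u' hmem en hen t0 ht0

theorem pvConsB_of_stable (n : Int) (E0 : List (Int × Int × Int × String)) (S : Int) (d : PVD)
    (hr0 : ∀ e ∈ E0, -n ≤ e.1 ∧ -n ≤ e.2.1 ∧ -5 ≤ e.2.2.1)
    (hle : ∀ e ∈ E0, e.1 ≤ n - 1 ∧ e.2.1 ≤ n - 1)
    (hKB : pvKB (pvStatesB (pvNormE n E0)) (pvNormE n E0) d)
    (hSU : pvSeedUp (pvNormE n E0) S d)
    (hRel : ∀ u ∈ PySem.List.pyRange 0 n 1, ∀ en ∈ (pvBuildG n E0).getD u [],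
      ∀ t0 : Int, (t0 = 0 ∨ t0 = 1) → pvRelCond d u (pvWrap n en.1) en.2.1 en.2.2 t0) :
    pvCons (pvNormE n E0) S d := by
  refine ⟨hSU, ?_, ?_⟩
  · intro e' he' t0 du hdu
    obtain ⟨e, he, rfl⟩ := List.mem_map.1 he'
    have ht01 := pvGet_t01 (pvNormE n E0) d hKB _ t0 du hdu
    have hu1 : pvWrap n e.1 ∈ PySem.List.pyRange 0 n 1 := by
      rw [PySem.List.mem_pyRange_one]
      have h1 := (hr0 e he).1
      have h2 := (hle e he).1
      refine ⟨pvWrap_nn n e.1 h1, ?_⟩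
      unfold pvWrap; split <;> omega
    have hent := (pvBuildG_mem2 n E0 e he).1
    exact hRel _ hu1 _ hent t0 ht01 du hdu
  · intro e' he' t0 du hdu
    obtain ⟨e, he, rfl⟩ := List.mem_map.1 he'
    have ht01 := pvGet_t01 (pvNormE n E0) d hKB _ t0 du hdu
    have hu2 : pvWrap n e.2.1 ∈ PySem.List.pyRange 0 n 1 := by
      rw [PySem.List.mem_pyRange_one]
      have h1 := (hr0 e he).2.1
      have h2 := (hle e he).2
      refine ⟨pvWrap_nn n e.2.1 h1, ?_⟩
      unfold pvWrap; split <;> omega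
    have hent := (pvBuildG_mem2 n E0 e he).2
    exact hRel _ hu2 _ hent t0 ht01 du hdu

theorem pvLoopB_best (n : Int) (E0 : List (Int × Int × Int × String)) (S : Int)
    (hr0 : ∀ e ∈ E0, -n ≤ e.1 ∧ -n ≤ e.2.1 ∧ -5 ≤ e.2.2.1)
    (hle : ∀ e ∈ E0, e.1 ≤ n - 1 ∧ e.2.1 ≤ n - 1) :
    ∀ (fuel : Nat) (d : PVD), pvInvB (pvStatesB (pvNormE n E0)) (pvNormE n E0) S d →
      pvPhi (pvK (pvStatesB (pvNormE n E0)) (pvNormE n E0)) (pvS0 (pvNormE n E0))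
        (pvStatesB (pvNormE n E0)) d < fuel →
      ∀ s, pvBest (pvNormE n E0) S s ((pvLoopB n (pvBuildG n E0) fuel d).get? s) := by
  have hnn := pvNormE_facts n E0 hr0
  have hGE : ∀ (u : Int), ∀ en ∈ (pvBuildG n E0).getD u [],
      pvLEdge (pvNormE n E0) u (pvWrap n en.1, en.2.1, en.2.2) :=
    fun u en hen => pvBuildG_mem n E0 u en hen
  intro fuel
  induction fuel with
  | zero => intro d _ h; omega
  | succ fuel ih =>
    intro d hInv hPhi s
    obtain ⟨hS, hKB, hSU⟩ := hInv
    have hpass : pvPassB n (pvBuildG n E0) (d, false) =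
        (PySem.List.pyRange 0 n 1).foldl (fun st u => pvNodeSweep n (pvBuildG n E0) st u)
          (d, false) := rfl
    have hp := pvUsFold_props (pvNormE n E0) S n (pvBuildG n E0) hnn hGE
      (PySem.List.pyRange 0 n 1) (d, false) hS hKB
    rw [← hpass] at hp
    dsimp only at hp
    by_cases hfl : (pvPassB n (pvBuildG n E0) (d, false)).2 = true
    · have hloop : pvLoopB n (pvBuildG n E0) (fuel + 1) d =
          pvLoopB n (pvBuildG n E0) fuel (pvPassB n (pvBuildG n E0) (d, false)).1 := by
        simp [pvLoopB, hfl]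
      rw [hloop]
      refine ih (pvPassB n (pvBuildG n E0) (d, false)).1
        ⟨hp.1.1, hp.1.2, pvSeedUp_mono _ S _ _ hp.2.1 hSU⟩ ?_ s
      rcases hp.2.2.2 hfl with h | h
      · simp at h
      · omega
    · have hfl' : (pvPassB n (pvBuildG n E0) (d, false)).2 = false := by
        revert hfl; cases (pvPassB n (pvBuildG n E0) (d, false)).2 <;> simp
      have hloop : pvLoopB n (pvBuildG n E0) (fuel + 1) d =
          (pvPassB n (pvBuildG n E0) (d, false)).1 := by
        simp [pvLoopB, hfl']
      rw [hpass] at hfl'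
      obtain ⟨_, heq, hconds⟩ := pvUsFold_false n (pvBuildG n E0)
        (PySem.List.pyRange 0 n 1) (d, false) hfl'
      rw [hloop, hpass, heq]
      exact pvBest_of (pvNormE n E0) S d hS
        (pvConsB_of_stable n E0 S d hr0 hle hKB hSU (by simpa using hconds)) s

-- ---------- port B: seeding ----------
theorem pvSeedStep_props (E : List (Int × Int × Int × String)) (S n : Int) (dd : PVD)
    (v : Int × Int × Int)
    (hkmem : (pvWrap n v.1, v.2.2) ∈ pvStatesB E)
    (hd0 : -pvS0 E ≤ v.2.1) (hdS : v.2.1 ≤ pvS0 E)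
    (hreach : pvReach E S (pvWrap n v.1, v.2.2) v.2.1)
    (hS : pvSound E S dd) (hKB : pvKB (pvStatesB E) E dd) :
    pvSound E S (pvSeedStep n dd v) ∧ pvKB (pvStatesB E) E (pvSeedStep n dd v) ∧
    pvDLe (pvSeedStep n dd v) dd ∧
    pvOLe ((pvSeedStep n dd v).get? (pvWrap n v.1, v.2.2)) v.2.1 := by
  have hW := pvW_pos E
  cases hg : dd.get? (pvWrap n v.1, v.2.2) with
  | none =>
    have hds : pvSeedStep n dd v = dd.insert (pvWrap n v.1, v.2.2) v.2.1 := by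
      simp [pvSeedStep, hg]
    have hins := pvInsert_step (pvStatesB E) E dd (pvWrap n v.1, v.2.2) v.2.1 hKB hkmem hd0 hW
      (Or.inl ⟨hg, by nlinarith⟩)
    rw [hds]
    refine ⟨?_, hins.1, hins.2.1,
      ⟨v.2.1, by rw [PySem.Dict.get?_insert]; simp, le_refl _⟩⟩
    intro s w hw
    rw [PySem.Dict.get?_insert] at hw
    split at hw
    · cases hw; subst ‹s = (pvWrap n v.1, v.2.2)›; exact hreach
    · exact hS s w hw
  | some cur =>
    by_cases hlt : v.2.1 < cur
    · have hds : pvSeedStep n dd v = dd.insert (pvWrap n v.1, v.2.2) v.2.1 := by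
        simp [pvSeedStep, hg, hlt]
      have hins := pvInsert_step (pvStatesB E) E dd (pvWrap n v.1, v.2.2) v.2.1 hKB hkmem hd0 hW
        (Or.inr ⟨cur, hg, hlt⟩)
      rw [hds]
      refine ⟨?_, hins.1, hins.2.1,
        ⟨v.2.1, by rw [PySem.Dict.get?_insert]; simp, le_refl _⟩⟩
      intro s w hw
      rw [PySem.Dict.get?_insert] at hw
      split at hw
      · cases hw; subst ‹s = (pvWrap n v.1, v.2.2)›; exact hreach
      · exact hS s w hw
    · have hds : pvSeedStep n dd v = dd := by simp [pvSeedStep, hg, hlt]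
      rw [hds]
      exact ⟨hS, hKB, pvDLe_refl _, ⟨cur, hg, by omega⟩⟩

theorem pvSeedFoldB (E : List (Int × Int × Int × String)) (S n : Int)
    (hnn : ∀ e ∈ E, 0 ≤ e.1 ∧ 0 ≤ e.2.1 ∧ -5 ≤ e.2.2.1) :
    ∀ (l : List (Int × Int × Int)) (dd : PVD),
      (∀ v ∈ l, pvLEdge E S (pvWrap n v.1, v.2.1, v.2.2)) →
      pvSound E S dd → pvKB (pvStatesB E) E dd →
      pvSound E S (l.foldl (pvSeedStep n) dd) ∧
      pvKB (pvStatesB E) E (l.foldl (pvSeedStep n) dd) ∧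
      pvDLe (l.foldl (pvSeedStep n) dd) dd := by
  intro l
  induction l with
  | nil => intro dd _ hS hKB; exact ⟨hS, hKB, pvDLe_refl _⟩
  | cons v vs ih =>
    intro dd hl hS hKB
    obtain ⟨_, hd0, hdS, hkmem, hreach⟩ :=
      pvLEdge_facts E S (pvWrap n v.1, v.2.1, v.2.2) hnn (hl v (List.mem_cons_self ..))
    have hstep := pvSeedStep_props E S n dd v hkmem hd0 hdS hreach hS hKB
    simp only [List.foldl_cons]
    have hrest := ih (pvSeedStep n dd v) (fun w hw => hl w (List.mem_cons_of_mem _ hw))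
      hstep.1 hstep.2.1
    exact ⟨hrest.1, hrest.2.1, pvDLe_trans _ _ _ hrest.2.2 hstep.2.2.1⟩

theorem pvSeedB_inv (n : Int) (E0 : List (Int × Int × Int × String)) (A : Int)
    (hr0 : ∀ e ∈ E0, -n ≤ e.1 ∧ -n ≤ e.2.1 ∧ -5 ≤ e.2.2.1) :
    pvInvB (pvStatesB (pvNormE n E0)) (pvNormE n E0) (pvWrap n A)
      (pvSeedB n ((pvBuildG n E0).getD (pvWrap n A) [])) := by
  have hnn := pvNormE_facts n E0 hr0
  have hL : ∀ v ∈ (pvBuildG n E0).getD (pvWrap n A) [],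
      pvLEdge (pvNormE n E0) (pvWrap n A) (pvWrap n v.1, v.2.1, v.2.2) :=
    fun v hv => pvBuildG_mem n E0 (pvWrap n A) v hv
  have hS0 : pvSound (pvNormE n E0) (pvWrap n A) (PySem.Dict.empty : PVD) := by
    intro s v hv; rw [PySem.Dict.get?_empty] at hv; cases hv
  have hmain := pvSeedFoldB (pvNormE n E0) (pvWrap n A) n hnn
    ((pvBuildG n E0).getD (pvWrap n A) []) PySem.Dict.empty hL hS0 (pvKB_empty _ _)
  refine ⟨hmain.1, hmain.2.1, ?_, ?_⟩
  · intro e' he' hx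
    obtain ⟨e, he, rfl⟩ := List.mem_map.1 he'
    have hent := (pvBuildG_mem2 n E0 e he).1
    rw [show pvWrap n e.1 = pvWrap n A from hx] at hent
    obtain ⟨l1, l2, hEeq⟩ := List.append_of_mem hent
    have hfold : pvSeedB n ((pvBuildG n E0).getD (pvWrap n A) []) =
        l2.foldl (pvSeedStep n)
          (pvSeedStep n (l1.foldl (pvSeedStep n) PySem.Dict.empty)
            (e.2.1, e.2.2.1, pvTid e.2.2.2)) := by
      unfold pvSeedB
      rw [hEeq, List.foldl_append, List.foldl_cons]
    have hl1 : ∀ v ∈ l1, pvLEdge (pvNormE n E0) (pvWrap n A) (pvWrap n v.1, v.2.1, v.2.2) :=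
      fun v hv => hL v (by rw [hEeq]; simp [hv])
    have hacc := pvSeedFoldB (pvNormE n E0) (pvWrap n A) n hnn l1 PySem.Dict.empty hl1 hS0
      (pvKB_empty _ _)
    obtain ⟨_, hd0, hdS, hkmem, hreach⟩ :=
      pvLEdge_facts (pvNormE n E0) (pvWrap n A)
        (pvWrap n e.2.1, e.2.2.1, pvTid e.2.2.2) hnn
        (hL (e.2.1, e.2.2.1, pvTid e.2.2.2) (by rw [hEeq]; simp))
    have hstep := pvSeedStep_props (pvNormE n E0) (pvWrap n A) n
      (l1.foldl (pvSeedStep n) PySem.Dict.empty) (e.2.1, e.2.2.1, pvTid e.2.2.2)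
      hkmem hd0 hdS hreach hacc.1 hacc.2.1
    have hl2 : ∀ v ∈ l2, pvLEdge (pvNormE n E0) (pvWrap n A) (pvWrap n v.1, v.2.1, v.2.2) :=
      fun v hv => hL v (by rw [hEeq]; simp [hv])
    have hrest := pvSeedFoldB (pvNormE n E0) (pvWrap n A) n hnn l2 _ hl2 hstep.1 hstep.2.1
    rw [hfold]
    exact pvDLe_OLe _ _ hrest.2.2 _ _ hstep.2.2.2
  · intro e' he' hy
    obtain ⟨e, he, rfl⟩ := List.mem_map.1 he'
    have hent := (pvBuildG_mem2 n E0 e he).2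
    rw [show pvWrap n e.2.1 = pvWrap n A from hy] at hent
    obtain ⟨l1, l2, hEeq⟩ := List.append_of_mem hent
    have hfold : pvSeedB n ((pvBuildG n E0).getD (pvWrap n A) []) =
        l2.foldl (pvSeedStep n)
          (pvSeedStep n (l1.foldl (pvSeedStep n) PySem.Dict.empty)
            (e.1, e.2.2.1, pvTid e.2.2.2)) := by
      unfold pvSeedB
      rw [hEeq, List.foldl_append, List.foldl_cons]
    have hl1 : ∀ v ∈ l1, pvLEdge (pvNormE n E0) (pvWrap n A) (pvWrap n v.1, v.2.1, v.2.2) :=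
      fun v hv => hL v (by rw [hEeq]; simp [hv])
    have hacc := pvSeedFoldB (pvNormE n E0) (pvWrap n A) n hnn l1 PySem.Dict.empty hl1 hS0
      (pvKB_empty _ _)
    obtain ⟨_, hd0, hdS, hkmem, hreach⟩ :=
      pvLEdge_facts (pvNormE n E0) (pvWrap n A)
        (pvWrap n e.1, e.2.2.1, pvTid e.2.2.2) hnn
        (hL (e.1, e.2.2.1, pvTid e.2.2.2) (by rw [hEeq]; simp))
    have hstep := pvSeedStep_props (pvNormE n E0) (pvWrap n A) n
      (l1.foldl (pvSeedStep n) PySem.Dict.empty) (e.1, e.2.2.1, pvTid e.2.2.2)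
      hkmem hd0 hdS hreach hacc.1 hacc.2.1
    have hl2 : ∀ v ∈ l2, pvLEdge (pvNormE n E0) (pvWrap n A) (pvWrap n v.1, v.2.1, v.2.2) :=
      fun v hv => hL v (by rw [hEeq]; simp [hv])
    have hrest := pvSeedFoldB (pvNormE n E0) (pvWrap n A) n hnn l2 _ hl2 hstep.1 hstep.2.1
    rw [hfold]
    exact pvDLe_OLe _ _ hrest.2.2 _ _ hstep.2.2.2

theorem pvAlt_best (E : List (Int × Int × Int × String)) (A : Int)
    (hr : ∀ e ∈ E, -(pvMaxNode E + 1) ≤ e.1 ∧ -(pvMaxNode E + 1) ≤ e.2.1 ∧ -5 ≤ e.2.2.1) :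
    ∀ s, pvBest (pvNormE (pvMaxNode E + 1) E) (pvWrap (pvMaxNode E + 1) A) s
      ((pvLoopB (pvMaxNode E + 1) (pvBuildG (pvMaxNode E + 1) E)
        (pvFuel (pvStatesA (pvMaxNode E + 1) E) E 0)
        (pvSeedB (pvMaxNode E + 1)
          ((pvBuildG (pvMaxNode E + 1) E).getD (pvWrap (pvMaxNode E + 1) A) []))).get? s) := by
  intro s
  have hle : ∀ e ∈ E, e.1 ≤ (pvMaxNode E + 1) - 1 ∧ e.2.1 ≤ (pvMaxNode E + 1) - 1 := by
    intro e he
    have h := pvMaxNode_ge E e he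
    omega
  have hInv := pvSeedB_inv (pvMaxNode E + 1) E A hr
  refine pvLoopB_best (pvMaxNode E + 1) E (pvWrap (pvMaxNode E + 1) A) hr hle
    (pvFuel (pvStatesA (pvMaxNode E + 1) E) E 0) _ hInv ?_ s
  have hphi := pvPhi_le (pvStatesB (pvNormE (pvMaxNode E + 1) E)) (pvNormE (pvMaxNode E + 1) E)
    (pvSeedB (pvMaxNode E + 1)
      ((pvBuildG (pvMaxNode E + 1) E).getD (pvWrap (pvMaxNode E + 1) A) []))
    hInv.2.1 (pvW_pos (pvNormE (pvMaxNode E + 1) E))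
  rw [pvFuel, pvStatesA_eq (pvMaxNode E + 1) E, pvK_norm, pvS0_norm] at *
  omega

theorem pvRelaxA_master (n : Int) (E : List (Int × Int × Int × String)) (S u t time : Int)
    (hnn : ∀ en ∈ pvNormE n E, 0 ≤ en.1 ∧ 0 ≤ en.2.1 ∧ -5 ≤ en.2.2.1)
    (hreach : pvReach (pvNormE n E) S (u, t) time) :
    ∀ (L : List (Int × Int × Int)) (q : List (Int × Int × Int)) (d : PVD),
      (∀ v ∈ L, pvLEdge (pvNormE n E) u (pvWrap n v.1, v.2.1, v.2.2)) →
      pvSound (pvNormE n E) S d → pvKB (pvStatesB (pvNormE n E)) (pvNormE n E) d →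
      time ≤ pvS0 (pvNormE n E) + d.size * pvW (pvNormE n E) →
      pvQInv n (pvNormE n E) S q d →
      (∀ s du, d.get? s = some du →
        (s = (u, t) ∧ du = time) ∨ (∃ w, (du, w, s.2) ∈ q ∧ pvWrap n w = s.1) ∨
        pvRelaxedE (pvNormE n E) d s.1 s.2 du) →
      pvSound (pvNormE n E) S (pvRelaxA n time t L (q, d)).2 ∧
      pvKB (pvStatesB (pvNormE n E)) (pvNormE n E) (pvRelaxA n time t L (q, d)).2 ∧
      pvDLe (pvRelaxA n time t L (q, d)).2 d ∧
      pvQInv n (pvNormE n E) S (pvRelaxA n time t L (q, d)).1 (pvRelaxA n time t L (q, d)).2 ∧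
      (∀ s du, (pvRelaxA n time t L (q, d)).2.get? s = some du →
        (s = (u, t) ∧ du = time) ∨
        (∃ w, (du, w, s.2) ∈ (pvRelaxA n time t L (q, d)).1 ∧ pvWrap n w = s.1) ∨
        pvRelaxedE (pvNormE n E) (pvRelaxA n time t L (q, d)).2 s.1 s.2 du) ∧
      (∀ v ∈ L, pvOLe ((pvRelaxA n time t L (q, d)).2.get? (pvWrap n v.1, v.2.2))
        (pvCost t v.2.2 + v.2.1 + time)) ∧
      (pvRelaxA n time t L (q, d)).1.length +
          pvPhi (pvK (pvStatesB (pvNormE n E)) (pvNormE n E)) (pvS0 (pvNormE n E))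
            (pvStatesB (pvNormE n E)) (pvRelaxA n time t L (q, d)).2 ≤
        q.length + pvPhi (pvK (pvStatesB (pvNormE n E)) (pvNormE n E)) (pvS0 (pvNormE n E))
            (pvStatesB (pvNormE n E)) d := by
  have hd : ∀ en ∈ pvNormE n E, -5 ≤ en.2.2.1 := fun en hen => (hnn en hen).2.2
  have hW := pvW_pos (pvNormE n E)
  intro L
  induction L with
  | nil =>
    intro q d _ hS hKB htb hQ hRQ
    have hnil : pvRelaxA n time t [] (q, d) = (q, d) := rfl
    rw [hnil]
    exact ⟨hS, hKB, pvDLe_refl d, hQ, hRQ, by simp, le_refl _⟩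
  | cons v L ih =>
    intro q d hL hS hKB htb hQ hRQ
    obtain ⟨_, hd0, hdS, hmem, hstepreach⟩ :=
      pvLEdge_step_facts (pvNormE n E) S u t time (pvWrap n v.1, v.2.1, v.2.2) hnn
        (hL v (List.mem_cons_self ..)) hreach
    have hnt0 : -pvS0 (pvNormE n E) ≤ pvCost t v.2.2 + v.2.1 + time :=
      pvReach_nonneg (pvNormE n E) S hd _ _ hstepreach
    have hcostle := pvCost_le t v.2.2
    cases hg : d.get? (pvWrap n v.1, v.2.2) with
    | none =>
      have hstepeq : pvRelaxA n time t (v :: L) (q, d) = pvRelaxA n time t L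
          (q ++ [(pvCost t v.2.2 + v.2.1 + time, v.1, v.2.2)],
           d.insert (pvWrap n v.1, v.2.2) (pvCost t v.2.2 + v.2.1 + time)) := by
        simp only [pvRelaxA, List.foldl_cons, hg]
      have hins := pvInsert_step (pvStatesB (pvNormE n E)) (pvNormE n E) d (pvWrap n v.1, v.2.2)
        (pvCost t v.2.2 + v.2.1 + time) hKB hmem hnt0 hW
        (Or.inl ⟨hg, by unfold pvW at *; linarith⟩)
      have hS' : pvSound (pvNormE n E) S
          (d.insert (pvWrap n v.1, v.2.2) (pvCost t v.2.2 + v.2.1 + time)) := by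
        intro s w hw
        rw [PySem.Dict.get?_insert] at hw
        split at hw
        · cases hw; subst ‹s = (pvWrap n v.1, v.2.2)›; exact hstepreach
        · exact hS s w hw
      have hsz : (d.size : Int) ≤
          (d.insert (pvWrap n v.1, v.2.2) (pvCost t v.2.2 + v.2.1 + time)).size := by
        rw [PySem.Dict.size_insert]; split <;> simp
      have htb' : time ≤ pvS0 (pvNormE n E) +
          (d.insert (pvWrap n v.1, v.2.2) (pvCost t v.2.2 + v.2.1 + time)).size *
            pvW (pvNormE n E) := by
        nlinarith
      have hQ' : pvQInv n (pvNormE n E) S (q ++ [(pvCost t v.2.2 + v.2.1 + time, v.1, v.2.2)])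
          (d.insert (pvWrap n v.1, v.2.2) (pvCost t v.2.2 + v.2.1 + time)) := by
        intro en hen
        rcases List.mem_append.1 hen with hen' | hen'
        · exact pvQInv_mono n (pvNormE n E) S q d _ hins.2.1 hQ en hen'
        · simp only [List.mem_singleton] at hen'
          subst hen'
          exact ⟨hstepreach, _, by rw [PySem.Dict.get?_insert]; simp, le_refl _⟩
      have hRQ' : ∀ s du,
          (d.insert (pvWrap n v.1, v.2.2) (pvCost t v.2.2 + v.2.1 + time)).get? s = some du →
          (s = (u, t) ∧ du = time) ∨
          (∃ w, (du, w, s.2) ∈ q ++ [(pvCost t v.2.2 + v.2.1 + time, v.1, v.2.2)] ∧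
            pvWrap n w = s.1) ∨
          pvRelaxedE (pvNormE n E)
            (d.insert (pvWrap n v.1, v.2.2) (pvCost t v.2.2 + v.2.1 + time)) s.1 s.2 du := by
        intro s du h
        rw [PySem.Dict.get?_insert] at h
        split at h
        · cases h; subst ‹s = (pvWrap n v.1, v.2.2)›
          exact Or.inr (Or.inl ⟨v.1, List.mem_append_right _ (by simp), rfl⟩)
        · rcases hRQ s du h with h' | ⟨w, hwm, hww⟩ | h'
          · exact Or.inl h'
          · exact Or.inr (Or.inl ⟨w, List.mem_append_left _ hwm, hww⟩)
          · exact Or.inr (Or.inr (pvRelaxedE_mono (pvNormE n E) d _ s.1 s.2 du hins.2.1 h'))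
      have hrest := ih _ _ (fun w hw => hL w (List.mem_cons_of_mem _ hw))
        hS' hins.1 htb' hQ' hRQ'
      rw [hstepeq]
      refine ⟨hrest.1, hrest.2.1, pvDLe_trans _ _ _ hrest.2.2.1 hins.2.1, hrest.2.2.2.1,
        hrest.2.2.2.2.1, ?_, ?_⟩
      · intro w hw
        rcases List.mem_cons.1 hw with rfl | hw'
        · exact pvDLe_OLe _ _ hrest.2.2.1 _ _
            ⟨_, by rw [PySem.Dict.get?_insert]; simp, le_refl _⟩
        · exact hrest.2.2.2.2.2.1 w hw'
      · have h1 := hrest.2.2.2.2.2.2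
        have h2 := hins.2.2
        simp only [List.length_append, List.length_singleton] at *
        omega
    | some cur =>
      by_cases hlt : pvCost t v.2.2 + v.2.1 + time < cur
      · have hstepeq : pvRelaxA n time t (v :: L) (q, d) = pvRelaxA n time t L
            (q ++ [(pvCost t v.2.2 + v.2.1 + time, v.1, v.2.2)],
             d.insert (pvWrap n v.1, v.2.2) (pvCost t v.2.2 + v.2.1 + time)) := by
          simp only [pvRelaxA, List.foldl_cons, hg, if_pos hlt]
        have hins := pvInsert_step (pvStatesB (pvNormE n E)) (pvNormE n E) d
          (pvWrap n v.1, v.2.2) (pvCost t v.2.2 + v.2.1 + time) hKB hmem hnt0 hW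
          (Or.inr ⟨cur, hg, hlt⟩)
        have hS' : pvSound (pvNormE n E) S
            (d.insert (pvWrap n v.1, v.2.2) (pvCost t v.2.2 + v.2.1 + time)) := by
          intro s w hw
          rw [PySem.Dict.get?_insert] at hw
          split at hw
          · cases hw; subst ‹s = (pvWrap n v.1, v.2.2)›; exact hstepreach
          · exact hS s w hw
        have hsz : (d.size : Int) ≤
            (d.insert (pvWrap n v.1, v.2.2) (pvCost t v.2.2 + v.2.1 + time)).size := by
          rw [PySem.Dict.size_insert]; split <;> simp
        have htb' : time ≤ pvS0 (pvNormE n E) +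
            (d.insert (pvWrap n v.1, v.2.2) (pvCost t v.2.2 + v.2.1 + time)).size *
              pvW (pvNormE n E) := by
          nlinarith
        have hQ' : pvQInv n (pvNormE n E) S
            (q ++ [(pvCost t v.2.2 + v.2.1 + time, v.1, v.2.2)])
            (d.insert (pvWrap n v.1, v.2.2) (pvCost t v.2.2 + v.2.1 + time)) := by
          intro en hen
          rcases List.mem_append.1 hen with hen' | hen'
          · exact pvQInv_mono n (pvNormE n E) S q d _ hins.2.1 hQ en hen'
          · simp only [List.mem_singleton] at hen'
            subst hen'
            exact ⟨hstepreach, _, by rw [PySem.Dict.get?_insert]; simp, le_refl _⟩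
        have hRQ' : ∀ s du,
            (d.insert (pvWrap n v.1, v.2.2) (pvCost t v.2.2 + v.2.1 + time)).get? s = some du →
            (s = (u, t) ∧ du = time) ∨
            (∃ w, (du, w, s.2) ∈ q ++ [(pvCost t v.2.2 + v.2.1 + time, v.1, v.2.2)] ∧
              pvWrap n w = s.1) ∨
            pvRelaxedE (pvNormE n E)
              (d.insert (pvWrap n v.1, v.2.2) (pvCost t v.2.2 + v.2.1 + time)) s.1 s.2 du := by
          intro s du h
          rw [PySem.Dict.get?_insert] at h
          split at h
          · cases h; subst ‹s = (pvWrap n v.1, v.2.2)›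
            exact Or.inr (Or.inl ⟨v.1, List.mem_append_right _ (by simp), rfl⟩)
          · rcases hRQ s du h with h' | ⟨w, hwm, hww⟩ | h'
            · exact Or.inl h'
            · exact Or.inr (Or.inl ⟨w, List.mem_append_left _ hwm, hww⟩)
            · exact Or.inr (Or.inr (pvRelaxedE_mono (pvNormE n E) d _ s.1 s.2 du hins.2.1 h'))
        have hrest := ih _ _ (fun w hw => hL w (List.mem_cons_of_mem _ hw))
          hS' hins.1 htb' hQ' hRQ'
        rw [hstepeq]
        refine ⟨hrest.1, hrest.2.1, pvDLe_trans _ _ _ hrest.2.2.1 hins.2.1, hrest.2.2.2.1,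
          hrest.2.2.2.2.1, ?_, ?_⟩
        · intro w hw
          rcases List.mem_cons.1 hw with rfl | hw'
          · exact pvDLe_OLe _ _ hrest.2.2.1 _ _
              ⟨_, by rw [PySem.Dict.get?_insert]; simp, le_refl _⟩
          · exact hrest.2.2.2.2.2.1 w hw'
        · have h1 := hrest.2.2.2.2.2.2
          have h2 := hins.2.2
          simp only [List.length_append, List.length_singleton] at *
          omega
      · have hstepeq : pvRelaxA n time t (v :: L) (q, d) = pvRelaxA n time t L (q, d) := by
          simp only [pvRelaxA, List.foldl_cons, hg, if_neg hlt]
        have hrest := ih _ _ (fun w hw => hL w (List.mem_cons_of_mem _ hw))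
          hS hKB htb hQ hRQ
        rw [hstepeq]
        refine ⟨hrest.1, hrest.2.1, hrest.2.2.1, hrest.2.2.2.1, hrest.2.2.2.2.1, ?_,
          hrest.2.2.2.2.2.2⟩
        intro w hw
        rcases List.mem_cons.1 hw with rfl | hw'
        · exact pvDLe_OLe _ _ hrest.2.2.1 _ _ ⟨cur, hg, by omega⟩
        · exact hrest.2.2.2.2.2.1 w hw'

theorem pvLoopA_best (n : Int) (E : List (Int × Int × Int × String)) (S : Int)
    (hnn : ∀ en ∈ pvNormE n E, 0 ≤ en.1 ∧ 0 ≤ en.2.1 ∧ -5 ≤ en.2.2.1) :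
    ∀ (fuel : Nat) (q : List (Int × Int × Int)) (d : PVD),
      pvInvA n (pvStatesB (pvNormE n E)) (pvNormE n E) S q d →
      q.length + pvPhi (pvK (pvStatesB (pvNormE n E)) (pvNormE n E)) (pvS0 (pvNormE n E))
        (pvStatesB (pvNormE n E)) d < fuel →
      ∀ s, pvBest (pvNormE n E) S s ((pvLoopA n (pvBuildG n E) fuel q d).get? s) := by
  intro fuel
  induction fuel with
  | zero => intro q d _ h; omega
  | succ fuel ih =>
    intro q d hInv hfuel s
    obtain ⟨hS, hKB, hSU, hQ, hRQ⟩ := hInv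
    cases hqm : pvQMin q with
    | none =>
      have hq : q = [] := pvQMin_none q hqm
      have hloop : pvLoopA n (pvBuildG n E) (fuel + 1) q d = d := by
        simp [pvLoopA, hqm]
      rw [hloop]
      refine pvBest_of (pvNormE n E) S d hS ⟨hSU, ?_, ?_⟩ s
      · intro e he t0 du hdu
        rcases hRQ _ du hdu with ⟨w, hwm, _⟩ | h
        · rw [hq] at hwm; cases hwm
        · exact h.1 e he rfl
      · intro e he t0 du hdu
        rcases hRQ _ du hdu with ⟨w, hwm, _⟩ | h
        · rw [hq] at hwm; cases hwm
        · exact h.2 e he rfl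
    | some en =>
      have hen := pvQMin_mem q en hqm
      obtain ⟨henreach, du, hdu, hdule⟩ := hQ en hen
      have hq'Q : pvQInv n (pvNormE n E) S (q.erase en) d :=
        fun e he => hQ e (List.mem_of_mem_erase he)
      have hlen : (q.erase en).length = q.length - 1 := List.length_erase_of_mem hen
      have hqpos : 0 < q.length := List.length_pos_of_mem hen
      by_cases hstale : du < en.1
      · -- stale entry: skip
        have hloop : pvLoopA n (pvBuildG n E) (fuel + 1) q d =
            pvLoopA n (pvBuildG n E) fuel (q.erase en) d := by
          simp only [pvLoopA, hqm, hdu]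
          rw [if_pos (by simp [hstale])]
        have hRQ' : pvRQ n (pvNormE n E) (q.erase en) d := by
          intro s' du' hdu'
          rcases hRQ s' du' hdu' with ⟨w, hwm, hww⟩ | h
          · refine Or.inl ⟨w, (List.mem_erase_of_ne ?_).2 hwm, hww⟩
            intro hcontra
            have h1 : du' = en.1 := congrArg Prod.fst hcontra
            have h2 : w = en.2.1 := congrArg (fun p => p.2.1) hcontra
            have h3 : s'.2 = en.2.2 := congrArg (fun p => p.2.2) hcontra
            have hs1 : s'.1 = pvWrap n en.2.1 := by rw [← hww, h2]
            have hs' : s' = (pvWrap n en.2.1, en.2.2) := Prod.ext hs1 h3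
            rw [hs', hdu] at hdu'
            injection hdu' with h4
            omega
          · exact Or.inr h
        rw [hloop]
        refine ih (q.erase en) d ⟨hS, hKB, hSU, hq'Q, hRQ'⟩ ?_ s
        omega
      · -- fresh entry: relax all edges out of state (pvWrap n en.2.1, en.2.2)
        have hfresh : du = en.1 := le_antisymm hdule (by omega)
        have hL : ∀ v ∈ (pvBuildG n E).getD (pvWrap n en.2.1) [],
            pvLEdge (pvNormE n E) (pvWrap n en.2.1) (pvWrap n v.1, v.2.1, v.2.2) :=
          fun v hv => pvBuildG_mem n E (pvWrap n en.2.1) v hv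
        have hRQx : ∀ s' du', d.get? s' = some du' →
            (s' = (pvWrap n en.2.1, en.2.2) ∧ du' = en.1) ∨
            (∃ w, (du', w, s'.2) ∈ q.erase en ∧ pvWrap n w = s'.1) ∨
            pvRelaxedE (pvNormE n E) d s'.1 s'.2 du' := by
          intro s' du' hdu'
          rcases hRQ s' du' hdu' with ⟨w, hwm, hww⟩ | h
          · by_cases hsen : (du', w, s'.2) = (en.1, en.2.1, en.2.2)
            · have h1 : du' = en.1 := congrArg Prod.fst hsen
              have h2 : w = en.2.1 := congrArg (fun p => p.2.1) hsen
              have h3 : s'.2 = en.2.2 := congrArg (fun p => p.2.2) hsen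
              have hs1 : s'.1 = pvWrap n en.2.1 := by rw [← hww, h2]
              exact Or.inl ⟨Prod.ext hs1 h3, h1⟩
            · exact Or.inr (Or.inl ⟨w, (List.mem_erase_of_ne hsen).2 hwm, hww⟩)
          · exact Or.inr (Or.inr h)
        have htb : en.1 ≤ pvS0 (pvNormE n E) + d.size * pvW (pvNormE n E) :=
          hfresh ▸ (hKB.2.2 _ du hdu).2
        have hmaster := pvRelaxA_master n E S (pvWrap n en.2.1) en.2.2 en.1 hnn henreach
          ((pvBuildG n E).getD (pvWrap n en.2.1) []) (q.erase en) d hL hS hKB htb hq'Q hRQx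
        have hloop : pvLoopA n (pvBuildG n E) (fuel + 1) q d =
            pvLoopA n (pvBuildG n E) fuel
              (pvRelaxA n en.1 en.2.2 ((pvBuildG n E).getD (pvWrap n en.2.1) [])
                (q.erase en, d)).1
              (pvRelaxA n en.1 en.2.2 ((pvBuildG n E).getD (pvWrap n en.2.1) [])
                (q.erase en, d)).2 := by
          simp only [pvLoopA, hqm, hdu]
          rw [if_neg (by simp [hstale])]
        have hRQfinal : pvRQ n (pvNormE n E)
            (pvRelaxA n en.1 en.2.2 ((pvBuildG n E).getD (pvWrap n en.2.1) [])
              (q.erase en, d)).1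
            (pvRelaxA n en.1 en.2.2 ((pvBuildG n E).getD (pvWrap n en.2.1) [])
              (q.erase en, d)).2 := by
          intro s' du' hdu'
          rcases hmaster.2.2.2.2.1 s' du' hdu' with ⟨hseq, hdueq⟩ | h | h
          · subst hseq; subst hdueq
            refine Or.inr ?_
            show pvRelaxedE (pvNormE n E) _ (pvWrap n en.2.1) en.2.2 en.1
            refine ⟨?_, ?_⟩
            · intro e' he' hx
              obtain ⟨e, he, rfl⟩ := List.mem_map.1 he'
              have hmem2 := (pvBuildG_mem2 n E e he).1
              rw [show pvWrap n e.1 = pvWrap n en.2.1 from hx] at hmem2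
              have hv := hmaster.2.2.2.2.2.1 _ hmem2
              dsimp only at hv ⊢
              exact pvOLe_mono _ _ _ hv (by omega)
            · intro e' he' hy
              obtain ⟨e, he, rfl⟩ := List.mem_map.1 he'
              have hmem2 := (pvBuildG_mem2 n E e he).2
              rw [show pvWrap n e.2.1 = pvWrap n en.2.1 from hy] at hmem2
              have hv := hmaster.2.2.2.2.2.1 _ hmem2
              dsimp only at hv ⊢
              exact pvOLe_mono _ _ _ hv (by omega)
          · exact Or.inl h
          · exact Or.inr h
        rw [hloop]
        refine ih _ _ ⟨hmaster.1, hmaster.2.1,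
          pvSeedUp_mono (pvNormE n E) S _ _ hmaster.2.2.1 hSU, hmaster.2.2.2.1, hRQfinal⟩ ?_ s
        have := hmaster.2.2.2.2.2.2
        omega

theorem pvA_best (E : List (Int × Int × Int × String)) (A : Int)
    (hr : ∀ e ∈ E, -(pvMaxNode E + 1) ≤ e.1 ∧ -(pvMaxNode E + 1) ≤ e.2.1 ∧ -5 ≤ e.2.2.1)
    (huniq : ∀ p ∈ pvSeedsPre (pvNormE (pvMaxNode E + 1) E) (pvWrap (pvMaxNode E + 1) A),
      ∀ q ∈ pvSeedsPre (pvNormE (pvMaxNode E + 1) E) (pvWrap (pvMaxNode E + 1) A),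
        p.1 = q.1 → p.2 = q.2) :
    ∀ s, pvBest (pvNormE (pvMaxNode E + 1) E) (pvWrap (pvMaxNode E + 1) A) s
      ((pvLoopA (pvMaxNode E + 1) (pvBuildG (pvMaxNode E + 1) E)
        (pvFuel (pvStatesA (pvMaxNode E + 1) E) E
          (pvSeedFold (pvMaxNode E + 1)
            ((pvBuildG (pvMaxNode E + 1) E).getD (pvWrap (pvMaxNode E + 1) A) [])).1.length)
        (pvSeedFold (pvMaxNode E + 1)
          ((pvBuildG (pvMaxNode E + 1) E).getD (pvWrap (pvMaxNode E + 1) A) [])).1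
        (pvSeedFold (pvMaxNode E + 1)
          ((pvBuildG (pvMaxNode E + 1) E).getD (pvWrap (pvMaxNode E + 1) A) [])).2).get? s) := by
  intro s
  have hnn := pvNormE_facts (pvMaxNode E + 1) E hr
  have hInv := pvInitA (pvMaxNode E + 1) E A hnn huniq
  refine pvLoopA_best (pvMaxNode E + 1) E (pvWrap (pvMaxNode E + 1) A) hnn _ _ _ hInv ?_ s
  have hphi := pvPhi_le (pvStatesB (pvNormE (pvMaxNode E + 1) E)) (pvNormE (pvMaxNode E + 1) E)
    (pvSeedFold (pvMaxNode E + 1)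
      ((pvBuildG (pvMaxNode E + 1) E).getD (pvWrap (pvMaxNode E + 1) A) [])).2
    hInv.2.1 (pvW_pos (pvNormE (pvMaxNode E + 1) E))
  rw [pvFuel, pvStatesA_eq (pvMaxNode E + 1) E, pvK_norm, pvS0_norm] at *
  omega

theorem pvReadout_congr (d1 d2 : PVD) (k0 k1 : Int × Int)
    (h0 : d1.get? k0 = d2.get? k0) (h1 : d1.get? k1 = d2.get? k1) :
    pvReadout d1 k0 k1 = pvReadout d2 k0 k1 := by
  unfold pvReadout; rw [h0, h1]

-- ===== VERDICT (by name: the statement is the Claim_ definition above) =====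
theorem tory_amos_spec : Claim_equal_tory_amos := by
  unfold Claim_equal_tory_amos
  intro E A B _ hPre
  unfold Spec_tory_amos
  obtain ⟨hne, hmx, hr, hA1, hA2, hB1, hB2, huniq⟩ := hPre
  have hBA := pvA_best E A hr huniq
  have hBB := pvAlt_best E A hr
  simp only [tory_amos, tory_amos_alt]
  exact pvReadout_congr _ _ _ _
    (pvBest_unique _ _ (pvWrap (pvMaxNode E + 1) B, 0) _ _
      (hBA (pvWrap (pvMaxNode E + 1) B, 0)) (hBB (pvWrap (pvMaxNode E + 1) B, 0)))
    (pvBest_unique _ _ (pvWrap (pvMaxNode E + 1) B, 1) _ _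
      (hBA (pvWrap (pvMaxNode E + 1) B, 1)) (hBB (pvWrap (pvMaxNode E + 1) B, 1)))
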